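-- pv_equiv track=rewrite | github.com/GitMonsters/octotetrahedral-agi | core/primitives.py | p_max_color_per_object
-- ===== SOURCE A (Python) =====
-- from typing import List, Dict, Tuple, Optional, Callable, Any, Set
-- from collections import Counter
--
-- Grid = List[List[int]]
--
-- def p_max_color_per_object(grid: Grid) -> Grid:
--     """Recolor each connected object with the color of the largest object."""
--     bg = _bg(grid)
--     objects = _find_objects(grid, bg)
--     if not objects:
--         return grid
--     largest = max(objects, key=lambda o: o['size'])
--     result = [[bg] * len(grid[0]) for _ in range(len(grid))]
--     for obj in objects:
--         for r, c in obj['cells']: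
--             result[r][c] = largest['color']
--     return result
--
-- def _bg(grid: Grid) -> int:
--     counts = Counter(c for row in grid for c in row)
--     return counts.most_common(1)[0][0] if counts else 0
--
-- def _find_objects(grid: Grid, bg: int) -> List[Dict]:
--     rows, cols = len(grid), len(grid[0]) if grid else 0
--     visited = [[False]*cols for _ in range(rows)]
--     objects = []
--     def flood(r, c, color):
--         stack = [(r, c)]
--         cells = []
--         while stack:
--             cr, cc = stack.pop()
--             if cr < 0 or cr >= rows or cc < 0 or cc >= cols:
--                 continue
--             if visited[cr][cc] or grid[cr][cc] != color:
--                 continue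
--             visited[cr][cc] = True
--             cells.append((cr, cc))
--             for dr, dc in [(-1,0),(1,0),(0,-1),(0,1)]:
--                 stack.append((cr+dr, cc+dc))
--         return cells
--     for r in range(rows):
--         for c in range(cols):
--             if not visited[r][c] and grid[r][c] != bg:
--                 cells = flood(r, c, grid[r][c])
--                 if cells:
--                     min_r = min(cr for cr, _ in cells)
--                     max_r = max(cr for cr, _ in cells)
--                     min_c = min(cc for _, cc in cells)
--                     max_c = max(cc for _, cc in cells)
--                     objects.append({
--                         'color': grid[r][c], 'cells': cells,
--                         'bbox': (min_r, min_c, max_r, max_c),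
--                         'size': len(cells),
--                     })
--     return objects
-- ===== SOURCE B (Python) =====
-- def p_max_color_per_object(grid):
--     """Recolor each connected object with the color of the largest object.
--
--     Union-find over cells instead of flood fill: roots are the minimal
--     row-major cell of each 4-connected same-color component.
--     """
--     # background = first color reaching the maximal count (single counting pass)
--     counts = {}
--     for row in grid:
--         for v in row:
--             counts[v] = counts.get(v, 0) + 1
--     bg = max(counts.items(), key=lambda kv: kv[1])[0] if counts else 0
--     rows = len(grid)
--     cols = len(grid[0]) if grid else 0
--     n = rows * cols
--     parent = list(range(n))
--
--     def find(x):
--         while parent[x] < x: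
--             x = parent[x]
--         return x
--
--     # union right/down same-color neighbours; smaller index becomes the root
--     for r in range(rows):
--         for c in range(cols):
--             i = r * cols + c
--             if c + 1 < cols and grid[r][c] == grid[r][c + 1]:
--                 ra, rb = find(i), find(i + 1)
--                 if ra != rb:
--                     parent[max(ra, rb)] = min(ra, rb)
--             if r + 1 < rows and grid[r][c] == grid[r + 1][c]:
--                 ra, rb = find(i), find(i + cols)
--                 if ra != rb:
--                     parent[max(ra, rb)] = min(ra, rb)
--
--     # component sizes of the non-background cells, keyed by root
--     sizes = {}
--     for r in range(rows):
--         for c in range(cols):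
--             if grid[r][c] != bg:
--                 root = find(r * cols + c)
--                 sizes[root] = sizes.get(root, 0) + 1
--     if not sizes:
--         return grid
--     win = max(sizes.items(), key=lambda kv: kv[1])[0]
--     color = grid[win // cols][win % cols]
--     return [[v if v == bg else color for v in row[:cols]] for row in grid]
-- ===== Notes on version B (the rewrite author's own statement) =====
-- stated objective: alternative
-- what changed: Replaces the explicit-stack flood fill that builds per-object cell lists and bounding boxes with a union-find over the rows x cols flat cell indices (smaller row-major index becomes the root, so each component's root is its first cell), a counting dict keyed by root, and a comprehension that recolors the non-background cells, instead of mutating a preallocated result matrix.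
import Mathlib
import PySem

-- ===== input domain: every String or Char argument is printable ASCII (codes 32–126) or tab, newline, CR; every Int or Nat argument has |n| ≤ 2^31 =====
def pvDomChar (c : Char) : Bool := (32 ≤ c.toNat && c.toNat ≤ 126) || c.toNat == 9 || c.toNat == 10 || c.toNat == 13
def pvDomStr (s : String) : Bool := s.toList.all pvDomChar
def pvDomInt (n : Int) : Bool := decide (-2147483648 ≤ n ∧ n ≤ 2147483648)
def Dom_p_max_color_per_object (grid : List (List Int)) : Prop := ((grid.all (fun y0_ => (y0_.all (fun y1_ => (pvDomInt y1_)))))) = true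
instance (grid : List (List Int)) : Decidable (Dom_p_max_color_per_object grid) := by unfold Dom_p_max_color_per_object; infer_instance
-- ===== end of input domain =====

-- B replaces A's explicit-stack flood fill (per-object cell lists, bboxes, result-matrix writes)
-- by a union-find over the rows x cols flat cell indices plus a root-keyed counting dict and a
-- recoloring comprehension; same return value wherever A returns (objective: alternative).

-- ===== PORT A =====
-- grid[r][c] for indices that the Python code has already bounds-checked (exact there)
def pvGridAt (grid : List (List Int)) (r c : Nat) : Int := (grid.getD r []).getD c 0

-- visited[r][c] / visited[r][c] = True; the Python code only touches in-range indices,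
-- where the defaults are never used (default true keeps the termination measure honest)
def pvVGet (v : List (List Bool)) (r c : Nat) : Bool := (v.getD r []).getD c true

def pvVSet (v : List (List Bool)) (r c : Nat) : List (List Bool) := v.set r ((v.getD r []).set c true)

-- number of unvisited entries (termination measure only)
def pvUnvis (v : List (List Bool)) : Nat := (v.map (fun row => row.count false)).sum

theorem pvCount_set_lt (row : List Bool) (c : Nat) (h : row.getD c true = false) :
    (row.set c true).count false < row.count false := by
  induction row generalizing c with
  | nil => simp at h
  | cons b t ih =>
    cases c with
    | zero => simp_all
    | succ c =>
      have := ih c (by simpa using h)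
      simp only [List.set_cons_succ, List.count_cons]
      omega

theorem pvUnvis_set_lt (v : List (List Bool)) (r c : Nat) (h : pvVGet v r c = false) :
    pvUnvis (pvVSet v r c) < pvUnvis v := by
  unfold pvVGet at h
  unfold pvUnvis pvVSet
  induction v generalizing r with
  | nil => simp at h
  | cons row t ih =>
    cases r with
    | zero =>
      simp only [List.getD_cons_zero] at h
      have := pvCount_set_lt row c h
      simp only [List.getD_cons_zero, List.set_cons_zero, List.map_cons, List.sum_cons]
      omega
    | succ r =>
      have := ih r (by simpa using h)
      simp only [List.getD_cons_succ, List.set_cons_succ, List.map_cons, List.sum_cons]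
      omega

-- the while-stack loop of _find_objects.flood (stack kept top-first)
def pvFloodLoop (grid : List (List Int)) (rows cols : Nat) (color : Int)
    (stack : List (Int × Int)) (cells : List (Nat × Nat)) (visited : List (List Bool)) :
    List (Nat × Nat) × List (List Bool) :=
  match stack with
  | [] => (cells, visited)
  | (cr, cc) :: rest =>
    if cr < 0 ∨ (rows : Int) ≤ cr ∨ cc < 0 ∨ (cols : Int) ≤ cc then
      pvFloodLoop grid rows cols color rest cells visited
    else
      if h2 : pvVGet visited cr.toNat cc.toNat = true ∨ pvGridAt grid cr.toNat cc.toNat ≠ color then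
        pvFloodLoop grid rows cols color rest cells visited
      else
        pvFloodLoop grid rows cols color
          ((cr, cc + 1) :: (cr, cc - 1) :: (cr + 1, cc) :: (cr - 1, cc) :: rest)
          (cells ++ [(cr.toNat, cc.toNat)]) (pvVSet visited cr.toNat cc.toNat)
termination_by (pvUnvis visited, stack.length)
decreasing_by
  · exact Prod.Lex.right _ (by simp)
  · exact Prod.Lex.right _ (by simp)
  · exact Prod.Lex.left _ _ (pvUnvis_set_lt _ _ _ (by
      push_neg at h2; simpa using h2.1))

-- an entry of the objects list ('color', 'cells', 'bbox', 'size')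
structure PvObj where
  color : Int
  cells : List (Nat × Nat)
  bbox : Nat × Nat × Nat × Nat
  size : Int
deriving Repr, DecidableEq

-- one step of the r/c scan of _find_objects
def pvScanCell (grid : List (List Int)) (rows cols : Nat) (bg : Int)
    (st : List (List Bool) × List PvObj) (r c : Nat) : List (List Bool) × List PvObj :=
  if pvVGet st.1 r c = false ∧ pvGridAt grid r c ≠ bg then
    let fl := pvFloodLoop grid rows cols (pvGridAt grid r c) [((r : Int), (c : Int))] [] st.1
    if fl.1 = [] then (fl.2, st.2)
    else
      (fl.2, st.2 ++ [{ color := pvGridAt grid r c,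
                        cells := fl.1,
                        bbox := ((PySem.List.min? (fl.1.map Prod.fst) (fun x => x)).getD 0,
                                 (PySem.List.min? (fl.1.map Prod.snd) (fun x => x)).getD 0,
                                 (PySem.List.max? (fl.1.map Prod.fst) (fun x => x)).getD 0,
                                 (PySem.List.max? (fl.1.map Prod.snd) (fun x => x)).getD 0),
                        size := (fl.1.length : Int) }])
  else st

-- _bg: Counter(...).most_common(1)[0][0] = first key reaching the maximal count
def pvBg (grid : List (List Int)) : Int :=
  match PySem.List.max? (PySem.Dict.counter (grid.flatMap (fun row => row))).items (fun kv => kv.2) with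
  | none => 0
  | some kv => kv.1

def pvFindObjects (grid : List (List Int)) (bg : Int) : List PvObj :=
  let rows := grid.length
  let cols := (grid.headD []).length
  let init : List (List Bool) := (List.range rows).map (fun _ => List.replicate cols false)
  ((List.range rows).foldl (fun st r =>
      (List.range cols).foldl (fun st c => pvScanCell grid rows cols bg st r c) st) (init, [])).2

def p_max_color_per_object (grid : List (List Int)) : List (List Int) :=
  let bg := pvBg grid
  let objects := pvFindObjects grid bg
  match PySem.List.max? objects (fun o => o.size) with
  | none => grid
  | some largest =>
    let result : List (List Int) :=
      (List.range grid.length).map (fun _ => List.replicate (grid.headD []).length bg)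
    objects.foldl (fun res o =>
      o.cells.foldl (fun res rc => res.set rc.1 ((res.getD rc.1 []).set rc.2 largest.color)) res) result

-- ===== PORT B =====
-- counts[v] = counts.get(v, 0) + 1 over all cells
def pvAltCounts (grid : List (List Int)) : PySem.Dict Int Int :=
  grid.foldl (fun d row => row.foldl (fun d v => d.modify v 0 (· + 1)) d) PySem.Dict.empty

def pvAltBg (grid : List (List Int)) : Int :=
  match PySem.List.max? (pvAltCounts grid).items (fun kv => kv.2) with
  | none => 0
  | some kv => kv.1

-- while parent[x] < x: x = parent[x]
def pvUfFind (parent : List Nat) (x : Nat) : Nat :=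
  let j := parent.getD x x
  if _h : j < x then pvUfFind parent j else x
termination_by x

-- parent[max(ra, rb)] = min(ra, rb) when the roots differ
def pvUfUnion (parent : List Nat) (i j : Nat) : List Nat :=
  let ra := pvUfFind parent i
  let rb := pvUfFind parent j
  if ra = rb then parent else parent.set (max ra rb) (min ra rb)

-- the two conditional unions done at cell (r, c)
def pvUnionStep (grid : List (List Int)) (rows cols : Nat) (parent : List Nat) (r c : Nat) :
    List Nat :=
  let i := r * cols + c
  let p1 := if c + 1 < cols ∧ pvGridAt grid r c = pvGridAt grid r (c + 1)
            then pvUfUnion parent i (i + 1) else parent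
  if r + 1 < rows ∧ pvGridAt grid r c = pvGridAt grid (r + 1) c
  then pvUfUnion p1 i (i + cols) else p1

def p_max_color_per_object_alt (grid : List (List Int)) : List (List Int) :=
  let bg := pvAltBg grid
  let rows := grid.length
  let cols := (grid.headD []).length
  let parent := (List.range rows).foldl (fun p r =>
      (List.range cols).foldl (fun p c => pvUnionStep grid rows cols p r c) p)
    (List.range (rows * cols))
  let sizes : PySem.Dict Nat Int := (List.range rows).foldl (fun d r =>
      (List.range cols).foldl (fun d c =>
        if pvGridAt grid r c ≠ bg then d.modify (pvUfFind parent (r * cols + c)) 0 (· + 1) else d) d)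
    PySem.Dict.empty
  match PySem.List.max? sizes.items (fun kv => kv.2) with
  | none => grid
  | some kv =>
    let color := pvGridAt grid (kv.1 / cols) (kv.1 % cols)
    grid.map (fun row =>
      (PySem.List.slice row none (some (cols : Int))).map (fun v => if v = bg then v else color))

-- ===== PRECONDITION & SPEC =====
-- Pre_ excludes exactly the grids with a row shorter than row 0, on which the Python A
-- raises IndexError (its scan indexes every row up to len(grid[0])); A returns on all others.
def Pre_p_max_color_per_object (grid : List (List Int)) : Prop :=
  ∀ row ∈ grid, (grid.headD []).length ≤ row.length
instance (grid : List (List Int)) : Decidable (Pre_p_max_color_per_object grid) := by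
  unfold Pre_p_max_color_per_object; infer_instance

def pvWitness_p_max_color_per_object : List (List Int) := [[1, 1, 2], [1, 2, 2]]

def Spec_p_max_color_per_object (grid : List (List Int)) (out : List (List Int)) : Prop :=
  out = p_max_color_per_object_alt grid
instance (grid : List (List Int)) (out : List (List Int)) :
    Decidable (Spec_p_max_color_per_object grid out) := by
  unfold Spec_p_max_color_per_object; infer_instance

-- ===== CLAIM (what is proved, stated in full; the proofs are below) =====
def Claim_equal_p_max_color_per_object : Prop :=
  ∀ (grid : List (List Int)), Dom_p_max_color_per_object grid →
    Pre_p_max_color_per_object grid →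
    Spec_p_max_color_per_object grid (p_max_color_per_object grid)

-- ===== LEMMAS AND PROOFS =====

-- ---------- basic grid notions ----------
def pvC (g : List (List Int)) : Nat := (g.headD []).length
def pvN (g : List (List Int)) : Nat := g.length * pvC g
def pvCell (g : List (List Int)) (i : Nat) : Nat × Nat := (i / pvC g, i % pvC g)
def pvIdx (g : List (List Int)) (x : Nat × Nat) : Nat := x.1 * pvC g + x.2
def pvInB (g : List (List Int)) (x : Nat × Nat) : Prop := x.1 < g.length ∧ x.2 < pvC g
def pvColP (g : List (List Int)) (x : Nat × Nat) : Int := pvGridAt g x.1 x.2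
def pvAdj (g : List (List Int)) (a b : Nat × Nat) : Prop :=
  pvInB g a ∧ pvInB g b ∧ pvColP g a = pvColP g b ∧
    ((a.1 = b.1 ∧ (a.2 + 1 = b.2 ∨ b.2 + 1 = a.2)) ∨
     (a.2 = b.2 ∧ (a.1 + 1 = b.1 ∨ b.1 + 1 = a.1)))
def pvReach (g : List (List Int)) : (Nat × Nat) → (Nat × Nat) → Prop :=
  Relation.ReflTransGen (pvAdj g)

theorem pvAdj_symm (g : List (List Int)) (a b : Nat × Nat) (h : pvAdj g a b) : pvAdj g b a := by
  obtain ⟨h1, h2, h3, h4⟩ := h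
  exact ⟨h2, h1, h3.symm, by tauto⟩

theorem pvReach_symm (g : List (List Int)) (a b : Nat × Nat) (h : pvReach g a b) :
    pvReach g b a := by
  induction h with
  | refl => exact Relation.ReflTransGen.refl
  | tail _ hadj ih =>
    exact Relation.ReflTransGen.trans (Relation.ReflTransGen.single (pvAdj_symm _ _ _ hadj)) ih

theorem pvReach_col (g : List (List Int)) (a b : Nat × Nat) (h : pvReach g a b) :
    pvColP g a = pvColP g b := by
  induction h with
  | refl => rfl
  | tail _ hadj ih => exact ih.trans hadj.2.2.1

theorem pvReach_inB (g : List (List Int)) (a b : Nat × Nat) (h : pvReach g a b) :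
    a = b ∨ (pvInB g a ∧ pvInB g b) := by
  induction h with
  | refl => exact Or.inl rfl
  | tail _ hadj ih =>
    rcases ih with h | h
    · exact Or.inr ⟨h ▸ hadj.1, hadj.2.1⟩
    · exact Or.inr ⟨h.1, hadj.2.1⟩

theorem pvReach_trans (g : List (List Int)) {a b c : Nat × Nat}
    (h1 : pvReach g a b) (h2 : pvReach g b c) : pvReach g a c :=
  Relation.ReflTransGen.trans h1 h2

theorem pvCell_idx (g : List (List Int)) (x : Nat × Nat) (hx : x.2 < pvC g) :
    pvCell g (pvIdx g x) = x := by
  unfold pvCell pvIdx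
  have hC : 0 < pvC g := by omega
  have h1 : (x.1 * pvC g + x.2) / pvC g = x.1 := by
    rw [Nat.mul_comm, Nat.mul_add_div hC, Nat.div_eq_of_lt hx]
    omega
  have h2 : (x.1 * pvC g + x.2) % pvC g = x.2 := by
    rw [Nat.mul_comm, Nat.mul_add_mod, Nat.mod_eq_of_lt hx]
  simp [h1, h2]

theorem pvIdx_lt (g : List (List Int)) (x : Nat × Nat) (hx : pvInB g x) :
    pvIdx g x < pvN g := by
  unfold pvIdx pvN
  calc x.1 * pvC g + x.2 < x.1 * pvC g + pvC g := by
        have := hx.2; omega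
    _ = (x.1 + 1) * pvC g := by ring
    _ ≤ g.length * pvC g := Nat.mul_le_mul_right _ hx.1

theorem pvInB_cell (g : List (List Int)) (i : Nat) (hi : i < pvN g) : pvInB g (pvCell g i) := by
  unfold pvInB pvCell pvN at *
  have hC : 0 < pvC g := by
    rcases Nat.eq_zero_or_pos (pvC g) with h | h
    · rw [h, Nat.mul_zero] at hi; omega
    · exact h
  exact ⟨(Nat.div_lt_iff_lt_mul hC).mpr hi, Nat.mod_lt _ hC⟩

theorem pvIdx_cell (g : List (List Int)) (i : Nat) : pvIdx g (pvCell g i) = i := by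
  unfold pvIdx pvCell
  rw [Nat.mul_comm]
  exact Nat.div_add_mod i (pvC g)

-- ---------- fold flattening (row-major nested loops as a single flat loop) ----------
theorem pvFoldlCongrMem {σ β : Type} (l : List β) (f f' : σ → β → σ) (init : σ)
    (h : ∀ s b, b ∈ l → f s b = f' s b) : l.foldl f init = l.foldl f' init := by
  induction l generalizing init with
  | nil => rfl
  | cons x t ih =>
    simp only [List.foldl_cons, h init x (List.mem_cons_self)]
    exact ih _ (fun s b hb => h s b (List.mem_cons_of_mem _ hb))

theorem pvFoldlFlatMap {α β σ : Type} (l : List α) (f : α → List β) (step : σ → β → σ)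
    (init : σ) :
    (l.flatMap f).foldl step init = l.foldl (fun s a => (f a).foldl step s) init := by
  induction l generalizing init with
  | nil => rfl
  | cons x t ih => simp [List.flatMap_cons, List.foldl_append, ih]

theorem pvFoldFlatten {σ : Type} (f : σ → Nat → Nat → σ) (R C : Nat) (init : σ) :
    (List.range R).foldl (fun st r => (List.range C).foldl (fun st c => f st r c) st) init
      = (List.range (R * C)).foldl (fun st i => f st (i / C) (i % C)) init := by
  induction R generalizing init with
  | zero => simp
  | succ R ih =>
    rcases Nat.eq_zero_or_pos C with hC | hC
    · subst hC; simp [List.range_succ, List.foldl_append, ih]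
    · rw [List.range_succ, List.foldl_append, ih, Nat.succ_mul, List.range_add,
        List.foldl_append, List.foldl_map]
      simp only [List.foldl_cons, List.foldl_nil]
      apply pvFoldlCongrMem
      intro s c hc
      have hclt : c < C := List.mem_range.mp hc
      have h1 : (R * C + c) / C = R := by
        rw [Nat.mul_comm, Nat.mul_add_div hC, Nat.div_eq_of_lt hclt]; omega
      have h2 : (R * C + c) % C = c := by
        rw [Nat.mul_comm, Nat.mul_add_mod, Nat.mod_eq_of_lt hclt]
      rw [h1, h2]


-- ---------- max? alignment ----------
theorem pvMaxRel {α β : Type} (Q : α → β → Prop) (l1 : List α) (l2 : List β)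
    (k1 : α → Int) (k2 : β → Int) (h : List.Forall₂ Q l1 l2)
    (hk : ∀ a b, Q a b → k1 a = k2 b) :
    Option.Rel Q (PySem.List.max? l1 k1) (PySem.List.max? l2 k2) := by
  unfold PySem.List.max?
  have aux : ∀ (acc1 : Option α) (acc2 : Option β), Option.Rel Q acc1 acc2 →
      Option.Rel Q
        (l1.foldl (fun acc x => match acc with
          | none => some x
          | some m => if k1 m < k1 x then some x else some m) acc1)
        (l2.foldl (fun acc x => match acc with
          | none => some x
          | some m => if k2 m < k2 x then some x else some m) acc2) := by
    induction h with
    | nil => intro a1 a2 hr; exact hr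
    | @cons a b t1 t2 hab _ ih =>
      intro a1 a2 hr
      simp only [List.foldl_cons]
      apply ih
      cases hr with
      | none => exact Option.Rel.some hab
      | some hq =>
        rename_i m1 m2
        show Option.Rel Q (if k1 m1 < k1 a then some a else some m1)
          (if k2 m2 < k2 b then some b else some m2)
        rw [hk _ _ hq, hk _ _ hab]
        by_cases hlt : k2 m2 < k2 b
        · rw [if_pos hlt, if_pos hlt]; exact Option.Rel.some hab
        · rw [if_neg hlt, if_neg hlt]; exact Option.Rel.some hq
  exact aux none none Option.Rel.none

-- ---------- union-find ----------
theorem pvUfFind_unfold (p : List Nat) (x : Nat) :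
    pvUfFind p x = if p.getD x x < x then pvUfFind p (p.getD x x) else x := by
  rw [pvUfFind]; split <;> simp_all

theorem pvUfFind_le (p : List Nat) (x : Nat) : pvUfFind p x ≤ x := by
  induction x using Nat.strong_induction_on with
  | _ x ih =>
    rw [pvUfFind_unfold]
    by_cases hx : p.getD x x < x
    · rw [if_pos hx]
      exact le_of_lt (lt_of_le_of_lt (ih _ hx) hx)
    · rw [if_neg hx]

theorem pvUfFind_fix (p : List Nat) (hle : ∀ i, p.getD i i ≤ i) (x : Nat) :
    p.getD (pvUfFind p x) (pvUfFind p x) = pvUfFind p x := by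
  induction x using Nat.strong_induction_on with
  | _ x ih =>
    rw [pvUfFind_unfold]
    by_cases hx : p.getD x x < x
    · rw [if_pos hx]; exact ih _ hx
    · rw [if_neg hx]; have := hle x; omega

theorem pvUfFind_root (p : List Nat) (hle : ∀ i, p.getD i i ≤ i) (x : Nat) :
    pvUfFind p (pvUfFind p x) = pvUfFind p x := by
  rw [pvUfFind_unfold, pvUfFind_fix p hle]; simp

theorem pvGetD_set {α : Type} (p : List α) (i : Nat) (v : α) (j : Nat) (d : α) :
    (p.set i v).getD j d = if j = i ∧ i < p.length then v else p.getD j d := by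
  simp only [List.getD_eq_getElem?_getD, List.getElem?_set]
  by_cases h1 : i = j
  · subst h1
    by_cases h2 : i < p.length <;> simp [h2]
  · have h2 : j ≠ i := fun hh => h1 hh.symm
    simp [h1, h2]

theorem pvUfFind_set (p : List Nat) (ra rb : Nat) (hle : ∀ i, p.getD i i ≤ i)
    (hra : p.getD ra ra = ra) (hrb : p.getD rb rb = rb) (hlt : rb < ra) (hlen : ra < p.length)
    (x : Nat) :
    pvUfFind (p.set ra rb) x = if pvUfFind p x = ra then rb else pvUfFind p x := by
  induction x using Nat.strong_induction_on with
  | _ x ih =>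
    by_cases hx : p.getD x x < x
    · have hxne : x ≠ ra := by
        intro h; rw [h, hra] at hx; omega
      have hget : (p.set ra rb).getD x x = p.getD x x := by
        rw [pvGetD_set]; simp [hxne]
      rw [pvUfFind_unfold, hget, if_pos hx, ih _ hx]
      conv_rhs => rw [pvUfFind_unfold, if_pos hx]
    · have hxx : p.getD x x = x := by have := hle x; omega
      have hfx : pvUfFind p x = x := by rw [pvUfFind_unfold, hxx]; simp
      by_cases hxa : x = ra
      · subst hxa
        have h1 : (p.set x rb).getD x x = rb := by rw [pvGetD_set]; simp [hlen]
        have h2 : (p.set x rb).getD rb rb = rb := by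
          have hne : rb ≠ x := by omega
          rw [pvGetD_set, if_neg (fun hh => hne hh.1)]
          exact hrb
        rw [pvUfFind_unfold, h1, if_pos hlt]
        rw [pvUfFind_unfold, h2]
        simp [hfx]
      · have h1 : (p.set ra rb).getD x x = x := by
          rw [pvGetD_set, if_neg (fun hh => hxa hh.1)]
          exact hxx
        rw [pvUfFind_unfold, h1]
        simp [hfx, hxa]

def pvPInv (g : List (List Int)) (p : List Nat) : Prop :=
  p.length = pvN g ∧ (∀ i, p.getD i i ≤ i) ∧
    (∀ i, pvReach g (pvCell g i) (pvCell g (p.getD i i)))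

theorem pvUfFind_reach (g : List (List Int)) (p : List Nat) (hp : pvPInv g p) (x : Nat) :
    pvReach g (pvCell g x) (pvCell g (pvUfFind p x)) := by
  obtain ⟨hlen, hle, hreach⟩ := hp
  induction x using Nat.strong_induction_on with
  | _ x ih =>
    rw [pvUfFind_unfold]
    by_cases hx : p.getD x x < x
    · rw [if_pos hx]
      exact pvReach_trans g (hreach x) (ih _ hx)
    · rw [if_neg hx]
      exact Relation.ReflTransGen.refl

theorem pvReach_roots (g : List (List Int)) (p : List Nat) (i j : Nat) (hp : pvPInv g p)
    (hij : pvReach g (pvCell g i) (pvCell g j)) :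
    pvReach g (pvCell g (pvUfFind p i)) (pvCell g (pvUfFind p j)) :=
  pvReach_trans g (pvReach_trans g (pvReach_symm _ _ _ (pvUfFind_reach g p hp i)) hij)
    (pvUfFind_reach g p hp j)

theorem pvUnion_inv (g : List (List Int)) (p : List Nat) (i j : Nat) (hp : pvPInv g p)
    (hij : pvReach g (pvCell g i) (pvCell g j)) (hi : i < pvN g) (hj : j < pvN g) :
    pvPInv g (pvUfUnion p i j) := by
  have hp' := hp
  unfold pvPInv at hp'
  obtain ⟨hlen, hle, hreach⟩ := hp'
  unfold pvUfUnion
  by_cases he : pvUfFind p i = pvUfFind p j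
  · simp only [he, if_pos rfl]; exact hp
  · rw [if_neg he]
    have hMlen : max (pvUfFind p i) (pvUfFind p j) < p.length := by
      have h1 := pvUfFind_le p i
      have h2 := pvUfFind_le p j
      rw [hlen]; omega
    have hrr : pvReach g (pvCell g (max (pvUfFind p i) (pvUfFind p j)))
        (pvCell g (min (pvUfFind p i) (pvUfFind p j))) := by
      rcases Nat.lt_or_ge (pvUfFind p i) (pvUfFind p j) with hc | hc
      · rw [Nat.max_eq_right (le_of_lt hc), Nat.min_eq_left (le_of_lt hc)]
        exact pvReach_symm _ _ _ (pvReach_roots g p i j hp hij)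
      · rw [Nat.max_eq_left hc, Nat.min_eq_right hc]
        exact pvReach_roots g p i j hp hij
    refine ⟨by rw [List.length_set]; exact hlen, ?_, ?_⟩
    · intro k
      rw [pvGetD_set]
      by_cases hk : k = max (pvUfFind p i) (pvUfFind p j) ∧
          max (pvUfFind p i) (pvUfFind p j) < p.length
      · rw [if_pos hk]; omega
      · rw [if_neg hk]; exact hle k
    · intro k
      rw [pvGetD_set]
      by_cases hk : k = max (pvUfFind p i) (pvUfFind p j) ∧
          max (pvUfFind p i) (pvUfFind p j) < p.length
      · rw [if_pos hk, hk.1]; exact hrr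
      · rw [if_neg hk]; exact hreach k

theorem pvUnion_find (g : List (List Int)) (p : List Nat) (i j : Nat) (hp : pvPInv g p)
    (hi : i < pvN g) (hj : j < pvN g) (x : Nat) (hne : pvUfFind p i ≠ pvUfFind p j) :
    pvUfFind (pvUfUnion p i j) x =
      if pvUfFind p x = max (pvUfFind p i) (pvUfFind p j)
      then min (pvUfFind p i) (pvUfFind p j) else pvUfFind p x := by
  have hp' := hp
  unfold pvPInv at hp'
  obtain ⟨hlen, hle, hreach⟩ := hp'
  unfold pvUfUnion
  rw [if_neg hne]
  have hMlen : max (pvUfFind p i) (pvUfFind p j) < p.length := by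
    have h1 := pvUfFind_le p i
    have h2 := pvUfFind_le p j
    rw [hlen]; omega
  have hfi := pvUfFind_fix p hle i
  have hfj := pvUfFind_fix p hle j
  have hmax : p.getD (max (pvUfFind p i) (pvUfFind p j)) (max (pvUfFind p i) (pvUfFind p j))
      = max (pvUfFind p i) (pvUfFind p j) := by
    rcases Nat.lt_or_ge (pvUfFind p i) (pvUfFind p j) with hc | hc
    · rw [Nat.max_eq_right (le_of_lt hc)]; exact hfj
    · rw [Nat.max_eq_left hc]; exact hfi
  have hmin : p.getD (min (pvUfFind p i) (pvUfFind p j)) (min (pvUfFind p i) (pvUfFind p j))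
      = min (pvUfFind p i) (pvUfFind p j) := by
    rcases Nat.lt_or_ge (pvUfFind p i) (pvUfFind p j) with hc | hc
    · rw [Nat.min_eq_left (le_of_lt hc)]; exact hfi
    · rw [Nat.min_eq_right hc]; exact hfj
  exact pvUfFind_set p _ _ hle hmax hmin (by omega) hMlen x

theorem pvUnion_pres_eq (g : List (List Int)) (p : List Nat) (i j : Nat) (hp : pvPInv g p)
    (hi : i < pvN g) (hj : j < pvN g) (a b : Nat)
    (hab : pvUfFind p a = pvUfFind p b) :
    pvUfFind (pvUfUnion p i j) a = pvUfFind (pvUfUnion p i j) b := by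
  by_cases he : pvUfFind p i = pvUfFind p j
  · unfold pvUfUnion; rw [if_pos he]; exact hab
  · rw [pvUnion_find g p i j hp hi hj a he, pvUnion_find g p i j hp hi hj b he, hab]

theorem pvUnion_new (g : List (List Int)) (p : List Nat) (i j : Nat) (hp : pvPInv g p)
    (hi : i < pvN g) (hj : j < pvN g) :
    pvUfFind (pvUfUnion p i j) i = pvUfFind (pvUfUnion p i j) j := by
  by_cases he : pvUfFind p i = pvUfFind p j
  · unfold pvUfUnion; rw [if_pos he, he]
  · rw [pvUnion_find g p i j hp hi hj i he, pvUnion_find g p i j hp hi hj j he]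
    rcases Nat.lt_or_ge (pvUfFind p i) (pvUfFind p j) with hc | hc
    · rw [Nat.max_eq_right (le_of_lt hc)]
      rw [if_neg (by omega), if_pos rfl, Nat.min_eq_left (le_of_lt hc)]
    · have hlt : pvUfFind p j < pvUfFind p i := by omega
      rw [Nat.max_eq_left hc]
      rw [if_pos rfl, if_neg (by omega), Nat.min_eq_right hc]

-- the parent list p_max_color_per_object_alt builds
def pvParentF (g : List (List Int)) : List Nat :=
  (List.range g.length).foldl (fun p r =>
    (List.range (pvC g)).foldl (fun p c => pvUnionStep g g.length (pvC g) p r c) p)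
    (List.range (g.length * pvC g))

def pvFind (g : List (List Int)) (i : Nat) : Nat := pvUfFind (pvParentF g) i

def pvEdgeOK (g : List (List Int)) (p : List Nat) (t : Nat) : Prop :=
  ∀ i < t,
    ((i % pvC g) + 1 < pvC g → pvColP g (pvCell g i) = pvColP g (pvCell g (i + 1)) →
      pvUfFind p i = pvUfFind p (i + 1)) ∧
    (i / pvC g + 1 < g.length → pvColP g (pvCell g i) = pvColP g (pvCell g (i + pvC g)) →
      pvUfFind p i = pvUfFind p (i + pvC g))

theorem pvAdj_right (g : List (List Int)) (r c : Nat) (hr : r < g.length) (hc : c + 1 < pvC g)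
    (hcol : pvGridAt g r c = pvGridAt g r (c + 1)) : pvAdj g (r, c) (r, c + 1) :=
  ⟨⟨hr, by omega⟩, ⟨hr, hc⟩, hcol, Or.inl ⟨rfl, Or.inl rfl⟩⟩

theorem pvAdj_down (g : List (List Int)) (r c : Nat) (hr : r + 1 < g.length) (hc : c < pvC g)
    (hcol : pvGridAt g r c = pvGridAt g (r + 1) c) : pvAdj g (r, c) (r + 1, c) :=
  ⟨⟨by omega, hc⟩, ⟨hr, hc⟩, hcol, Or.inr ⟨rfl, Or.inl rfl⟩⟩

theorem pvUnionStep_spec (g : List (List Int)) (p : List Nat) (t : Nat) (ht : t < pvN g)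
    (hp : pvPInv g p) :
    pvPInv g (pvUnionStep g g.length (pvC g) p (t / pvC g) (t % pvC g)) ∧
    (∀ a b, pvUfFind p a = pvUfFind p b →
      pvUfFind (pvUnionStep g g.length (pvC g) p (t / pvC g) (t % pvC g)) a
        = pvUfFind (pvUnionStep g g.length (pvC g) p (t / pvC g) (t % pvC g)) b) ∧
    ((t % pvC g) + 1 < pvC g → pvColP g (pvCell g t) = pvColP g (pvCell g (t + 1)) →
      pvUfFind (pvUnionStep g g.length (pvC g) p (t / pvC g) (t % pvC g)) t
        = pvUfFind (pvUnionStep g g.length (pvC g) p (t / pvC g) (t % pvC g)) (t + 1)) ∧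
    ((t / pvC g) + 1 < g.length → pvColP g (pvCell g t) = pvColP g (pvCell g (t + pvC g)) →
      pvUfFind (pvUnionStep g g.length (pvC g) p (t / pvC g) (t % pvC g)) t
        = pvUfFind (pvUnionStep g g.length (pvC g) p (t / pvC g) (t % pvC g)) (t + pvC g)) := by
  have hC : 0 < pvC g := by
    rcases Nat.eq_zero_or_pos (pvC g) with h | h
    · unfold pvN at ht; rw [h, Nat.mul_zero] at ht; omega
    · exact h
  have hrc : (t / pvC g) * pvC g + t % pvC g = t := by
    rw [Nat.mul_comm]; exact Nat.div_add_mod t (pvC g)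
  have hrlt : t / pvC g < g.length := (Nat.div_lt_iff_lt_mul hC).mpr ht
  have hclt : t % pvC g < pvC g := Nat.mod_lt _ hC
  -- cell bridges
  have hcellt : pvCell g t = (t / pvC g, t % pvC g) := rfl
  have hidx1 : ∀ _ : t % pvC g + 1 < pvC g, pvIdx g (t / pvC g, t % pvC g + 1) = t + 1 := by
    intro _; unfold pvIdx; simp only; rw [← Nat.add_assoc, hrc]
  have hidx2 : pvIdx g (t / pvC g + 1, t % pvC g) = t + pvC g := by
    unfold pvIdx; simp only; rw [Nat.add_mul, Nat.one_mul, Nat.add_right_comm, hrc]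
  have hcell1 : t % pvC g + 1 < pvC g → pvCell g (t + 1) = (t / pvC g, t % pvC g + 1) := by
    intro h; rw [← hidx1 h]; exact pvCell_idx g _ h
  have hcell2 : pvCell g (t + pvC g) = (t / pvC g + 1, t % pvC g) := by
    rw [← hidx2]; exact pvCell_idx g _ hclt
  have hlt1 : t % pvC g + 1 < pvC g → t + 1 < pvN g := by
    intro h; rw [← hidx1 h]; exact pvIdx_lt g _ ⟨hrlt, h⟩
  have hlt2 : t / pvC g + 1 < g.length → t + pvC g < pvN g := by
    intro h; rw [← hidx2]; exact pvIdx_lt g _ ⟨h, hclt⟩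
  have hreach1 : t % pvC g + 1 < pvC g →
      pvGridAt g (t / pvC g) (t % pvC g) = pvGridAt g (t / pvC g) (t % pvC g + 1) →
      pvReach g (pvCell g t) (pvCell g (t + 1)) := by
    intro h hcol
    rw [hcellt, hcell1 h]
    exact Relation.ReflTransGen.single (pvAdj_right g _ _ hrlt h hcol)
  have hreach2 : t / pvC g + 1 < g.length →
      pvGridAt g (t / pvC g) (t % pvC g) = pvGridAt g (t / pvC g + 1) (t % pvC g) →
      pvReach g (pvCell g t) (pvCell g (t + pvC g)) := by
    intro h hcol
    rw [hcellt, hcell2]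
    exact Relation.ReflTransGen.single (pvAdj_down g _ _ h hclt hcol)
  have hstep : pvUnionStep g g.length (pvC g) p (t / pvC g) (t % pvC g)
      = (if (t / pvC g) + 1 < g.length ∧
            pvGridAt g (t / pvC g) (t % pvC g) = pvGridAt g ((t / pvC g) + 1) (t % pvC g)
         then pvUfUnion (if (t % pvC g) + 1 < pvC g ∧
                pvGridAt g (t / pvC g) (t % pvC g) = pvGridAt g (t / pvC g) ((t % pvC g) + 1)
              then pvUfUnion p t (t + 1) else p) t (t + pvC g)
         else (if (t % pvC g) + 1 < pvC g ∧
                pvGridAt g (t / pvC g) (t % pvC g) = pvGridAt g (t / pvC g) ((t % pvC g) + 1)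
              then pvUfUnion p t (t + 1) else p)) := by
    unfold pvUnionStep
    rw [hrc]
  rw [hstep]
  by_cases hc1 : (t % pvC g) + 1 < pvC g ∧
      pvGridAt g (t / pvC g) (t % pvC g) = pvGridAt g (t / pvC g) ((t % pvC g) + 1)
  all_goals by_cases hc2 : (t / pvC g) + 1 < g.length ∧
      pvGridAt g (t / pvC g) (t % pvC g) = pvGridAt g ((t / pvC g) + 1) (t % pvC g)
  · -- both unions
    rw [if_pos hc1, if_pos hc2]
    have hp1 : pvPInv g (pvUfUnion p t (t + 1)) :=
      pvUnion_inv g p t (t + 1) hp (hreach1 hc1.1 hc1.2) ht (hlt1 hc1.1)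
    have hp2 : pvPInv g (pvUfUnion (pvUfUnion p t (t + 1)) t (t + pvC g)) :=
      pvUnion_inv g _ t (t + pvC g) hp1 (hreach2 hc2.1 hc2.2) ht (hlt2 hc2.1)
    refine ⟨hp2, ?_, ?_, ?_⟩
    · intro a b hab
      exact pvUnion_pres_eq g _ t (t + pvC g) hp1 ht (hlt2 hc2.1) a b
        (pvUnion_pres_eq g p t (t + 1) hp ht (hlt1 hc1.1) a b hab)
    · intro _ _
      exact pvUnion_pres_eq g _ t (t + pvC g) hp1 ht (hlt2 hc2.1) t (t + 1)
        (pvUnion_new g p t (t + 1) hp ht (hlt1 hc1.1))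
    · intro _ _
      exact pvUnion_new g _ t (t + pvC g) hp1 ht (hlt2 hc2.1)
  · rw [if_pos hc1, if_neg hc2]
    have hp1 : pvPInv g (pvUfUnion p t (t + 1)) :=
      pvUnion_inv g p t (t + 1) hp (hreach1 hc1.1 hc1.2) ht (hlt1 hc1.1)
    refine ⟨hp1, ?_, ?_, ?_⟩
    · intro a b hab
      exact pvUnion_pres_eq g p t (t + 1) hp ht (hlt1 hc1.1) a b hab
    · intro _ _
      exact pvUnion_new g p t (t + 1) hp ht (hlt1 hc1.1)
    · intro h1 h2
      rw [hcellt, hcell2] at h2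
      exact absurd ⟨h1, h2⟩ hc2
  · rw [if_neg hc1, if_pos hc2]
    have hp2 : pvPInv g (pvUfUnion p t (t + pvC g)) :=
      pvUnion_inv g p t (t + pvC g) hp (hreach2 hc2.1 hc2.2) ht (hlt2 hc2.1)
    refine ⟨hp2, ?_, ?_, ?_⟩
    · intro a b hab
      exact pvUnion_pres_eq g p t (t + pvC g) hp ht (hlt2 hc2.1) a b hab
    · intro h1 h2
      rw [hcellt, hcell1 h1] at h2
      exact absurd ⟨h1, h2⟩ hc1
    · intro _ _
      exact pvUnion_new g p t (t + pvC g) hp ht (hlt2 hc2.1)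
  · rw [if_neg hc1, if_neg hc2]
    refine ⟨hp, fun a b hab => hab, ?_, ?_⟩
    · intro h1 h2
      rw [hcellt, hcell1 h1] at h2
      exact absurd ⟨h1, h2⟩ hc1
    · intro h1 h2
      rw [hcellt, hcell2] at h2
      exact absurd ⟨h1, h2⟩ hc2

theorem pvUnionFold_spec (g : List (List Int)) :
    pvPInv g (pvParentF g) ∧ pvEdgeOK g (pvParentF g) (pvN g) := by
  have hmain : ∀ t, t ≤ pvN g →
      pvPInv g ((List.range t).foldl
        (fun p i => pvUnionStep g g.length (pvC g) p (i / pvC g) (i % pvC g))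
        (List.range (pvN g))) ∧
      pvEdgeOK g ((List.range t).foldl
        (fun p i => pvUnionStep g g.length (pvC g) p (i / pvC g) (i % pvC g))
        (List.range (pvN g))) t := by
    intro t
    induction t with
    | zero =>
      intro _
      simp only [List.range_zero, List.foldl_nil]
      have hg : ∀ i, (List.range (pvN g)).getD i i = i := by
        intro i
        by_cases h : i < pvN g
        · rw [List.getD_eq_getElem _ _ (by simpa using h)]; simp
        · rw [List.getD_eq_default _ _ (by simpa using Nat.le_of_not_lt h)]
      refine ⟨⟨by simp, fun i => by rw [hg], fun i => by rw [hg]; exact Relation.ReflTransGen.refl⟩, fun i hi => by omega⟩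
    | succ t ih =>
      intro ht
      have ih' := ih (by omega)
      rw [List.range_succ, List.foldl_append, List.foldl_cons, List.foldl_nil]
      have hspec := pvUnionStep_spec g _ t (by omega) ih'.1
      refine ⟨hspec.1, ?_⟩
      intro i hi
      rcases Nat.lt_or_ge i t with hit | hit
      · exact ⟨fun h1 h2 => hspec.2.1 _ _ ((ih'.2 i hit).1 h1 h2),
          fun h1 h2 => hspec.2.1 _ _ ((ih'.2 i hit).2 h1 h2)⟩
      · have : i = t := by omega
        subst this
        exact ⟨hspec.2.2.1, hspec.2.2.2⟩
  have hPF : pvParentF g = (List.range (pvN g)).foldl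
      (fun p i => pvUnionStep g g.length (pvC g) p (i / pvC g) (i % pvC g))
      (List.range (pvN g)) := by
    unfold pvParentF pvN
    rw [pvFoldFlatten]
  rw [hPF]
  exact hmain _ le_rfl

theorem pvAdj_find_aux (g : List (List Int)) (a b : Nat × Nat) (hia : pvInB g a)
    (hib : pvInB g b) (hcol : pvColP g a = pvColP g b) :
    (a.1 = b.1 ∧ a.2 + 1 = b.2) ∨ (a.2 = b.2 ∧ a.1 + 1 = b.1) →
    pvFind g (pvIdx g a) = pvFind g (pvIdx g b) := by
  intro hgeo
  have hE := (pvUnionFold_spec g).2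
  have hca := pvCell_idx g a hia.2
  have hcb := pvCell_idx g b hib.2
  have hlta := pvIdx_lt g a hia
  have hmod : pvIdx g a % pvC g = a.2 := congrArg Prod.snd hca
  have hdiv : pvIdx g a / pvC g = a.1 := congrArg Prod.fst hca
  have hb1 := hib.1
  have hb2 := hib.2
  rcases hgeo with ⟨h1, h2⟩ | ⟨h1, h2⟩
  · have hidxb : pvIdx g b = pvIdx g a + 1 := by
      unfold pvIdx; rw [← h1, ← h2]; ring
    have := (hE (pvIdx g a) hlta).1
      (by rw [hmod]; omega)
      (by rw [← hidxb, hca, hcb]; exact hcol)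
    rw [← hidxb] at this
    exact this
  · have hidxb : pvIdx g b = pvIdx g a + pvC g := by
      unfold pvIdx; rw [← h1, ← h2]; ring
    have := (hE (pvIdx g a) hlta).2
      (by rw [hdiv]; omega)
      (by rw [← hidxb, hca, hcb]; exact hcol)
    rw [← hidxb] at this
    exact this

theorem pvAdj_find (g : List (List Int)) (a b : Nat × Nat) (h : pvAdj g a b) :
    pvFind g (pvIdx g a) = pvFind g (pvIdx g b) := by
  obtain ⟨hia, hib, hcol, hgeo⟩ := h
  rcases hgeo with ⟨h1, h2 | h2⟩ | ⟨h1, h2 | h2⟩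
  · exact pvAdj_find_aux g a b hia hib hcol (Or.inl ⟨h1, h2⟩)
  · exact (pvAdj_find_aux g b a hib hia hcol.symm (Or.inl ⟨h1.symm, h2⟩)).symm
  · exact pvAdj_find_aux g a b hia hib hcol (Or.inr ⟨h1, h2⟩)
  · exact (pvAdj_find_aux g b a hib hia hcol.symm (Or.inr ⟨h1.symm, h2⟩)).symm

theorem pvReach_find (g : List (List Int)) (a b : Nat × Nat) (h : pvReach g a b) :
    pvFind g (pvIdx g a) = pvFind g (pvIdx g b) := by
  induction h with
  | refl => rfl
  | tail _ hadj ih => exact ih.trans (pvAdj_find _ _ _ hadj)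

theorem pvFind_le (g : List (List Int)) (i : Nat) : pvFind g i ≤ i :=
  pvUfFind_le _ _

theorem pvFind_root (g : List (List Int)) (i : Nat) : pvFind g (pvFind g i) = pvFind g i :=
  pvUfFind_root _ (pvUnionFold_spec g).1.2.1 _

theorem pvFind_reach (g : List (List Int)) (i : Nat) :
    pvReach g (pvCell g i) (pvCell g (pvFind g i)) :=
  pvUfFind_reach g _ (pvUnionFold_spec g).1 i

-- the central characterisation: x lies in the component whose root is m iff find(idx x) = m
theorem pvReach_iff_find (g : List (List Int)) (x : Nat × Nat) (hx : pvInB g x) (m : Nat)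
    (hroot : pvFind g m = m) :
    pvReach g (pvCell g m) x ↔ pvFind g (pvIdx g x) = m := by
  constructor
  · intro h
    have h2 := pvReach_find g _ _ h
    rwa [pvIdx_cell, hroot, eq_comm] at h2
  · intro h
    have h2 := pvFind_reach g (pvIdx g x)
    rw [h, pvCell_idx g x hx.2] at h2
    exact pvReach_symm _ _ _ h2

-- ---------- visited matrices ----------
def pvVShape (g : List (List Int)) (v : List (List Bool)) : Prop :=
  v.length = g.length ∧ ∀ row ∈ v, row.length = pvC g

theorem pvVShape_set (g : List (List Int)) (v : List (List Bool)) (r c : Nat)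
    (h : pvVShape g v) : pvVShape g (pvVSet v r c) := by
  obtain ⟨hl, hrow⟩ := h
  refine ⟨by simp [pvVSet, hl], ?_⟩
  intro row hmem
  unfold pvVSet at hmem
  by_cases hr : r < v.length
  · rcases List.mem_or_eq_of_mem_set hmem with h | h
    · exact hrow _ h
    · subst h
      rw [List.length_set, List.getD_eq_getElem _ _ hr]
      exact hrow _ (List.getElem_mem hr)
  · rw [List.set_eq_of_length_le (Nat.le_of_not_lt hr)] at hmem
    exact hrow _ hmem

theorem pvVGet_set_self (g : List (List Int)) (v : List (List Bool)) (r c : Nat)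
    (h : pvVShape g v) (hr : r < g.length) (hc : c < pvC g) :
    pvVGet (pvVSet v r c) r c = true := by
  have hrv : r < v.length := by rw [h.1]; exact hr
  have hcl : c < (v.getD r []).length := by
    rw [List.getD_eq_getElem _ _ hrv, h.2 _ (List.getElem_mem hrv)]; exact hc
  have hcl2 : c < v[r].length := by rwa [List.getD_eq_getElem _ _ hrv] at hcl
  unfold pvVGet pvVSet
  simp [List.getD_eq_getElem?_getD, List.getElem?_set, hrv, hcl2]

theorem pvVGet_set_ne (v : List (List Bool)) (r c r' c' : Nat) (h : (r', c') ≠ (r, c)) :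
    pvVGet (pvVSet v r c) r' c' = pvVGet v r' c' := by
  unfold pvVGet pvVSet
  by_cases hr : r' = r
  · subst hr
    have hc : c' ≠ c := by intro h2; exact h (by rw [h2])
    by_cases hrl : r' < v.length
    · simp [List.getD_eq_getElem?_getD, List.getElem?_set, hrl, hc, Ne.symm hc]
    · rw [List.set_eq_of_length_le (Nat.le_of_not_lt hrl)]
  · simp [List.getD_eq_getElem?_getD, List.getElem?_set, Ne.symm hr]

-- ---------- the flood loop returns exactly the component ----------
def pvPairI (x : Nat × Nat) : Int × Int := ((x.1 : Int), (x.2 : Int))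

def pvFloodInv (g : List (List Int)) (s : Nat × Nat) (V : List (List Bool))
    (stack : List (Int × Int)) (cells : List (Nat × Nat)) (V' : List (List Bool)) : Prop :=
  pvVShape g V' ∧
  (∀ x : Nat × Nat, pvVGet V' x.1 x.2 = true ↔ (pvVGet V x.1 x.2 = true ∨ x ∈ cells)) ∧
  cells.Nodup ∧
  (∀ x ∈ cells, pvReach g s x) ∧
  (∀ x : Nat × Nat, pvPairI x ∈ stack → pvInB g x → pvColP g x = pvColP g s → pvReach g s x) ∧
  (∀ x ∈ cells, ∀ y, pvAdj g x y → y ∈ cells ∨ pvPairI y ∈ stack) ∧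
  (s ∈ cells ∨ pvPairI s ∈ stack)

theorem pvPairI_inj (x y : Nat × Nat) (h : pvPairI x = pvPairI y) : x = y := by
  obtain ⟨a, b⟩ := x
  obtain ⟨c, d⟩ := y
  simp only [pvPairI, Prod.mk.injEq] at h ⊢
  omega

theorem pvInv_skip (g : List (List Int)) (s : Nat × Nat) (V : List (List Bool))
    (hs : pvInB g s) (hfresh : ∀ x, pvReach g s x → pvVGet V x.1 x.2 = false)
    (cr cc : Int) (rest : List (Int × Int)) (cells : List (Nat × Nat)) (V' : List (List Bool))
    (hinv : pvFloodInv g s V ((cr, cc) :: rest) cells V')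
    (hskip : (cr < 0 ∨ (g.length : Int) ≤ cr ∨ cc < 0 ∨ (pvC g : Int) ≤ cc) ∨
      (pvVGet V' cr.toNat cc.toNat = true ∨ pvGridAt g cr.toNat cc.toNat ≠ pvColP g s)) :
    pvFloodInv g s V rest cells V' := by
  obtain ⟨h1, h2, h3, h4, h5, h6, h7⟩ := hinv
  have hcover : ∀ y : Nat × Nat, pvPairI y = (cr, cc) → pvReach g s y → y ∈ cells := by
    intro y hy hrs
    have hy1 : (y.1 : Int) = cr := congrArg Prod.fst hy
    have hy2 : (y.2 : Int) = cc := congrArg Prod.snd hy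
    have hyn : y = (cr.toNat, cc.toNat) := by
      obtain ⟨a, b⟩ := y
      simp only [Prod.mk.injEq]
      constructor <;> omega
    rcases hskip with hoob | hvis | hcolr
    · exfalso
      rcases pvReach_inB g s y hrs with he | ⟨_, hby⟩
      · rw [← he] at hy1 hy2
        have := hs.1; have := hs.2
        omega
      · have := hby.1; have := hby.2
        omega
    · have := (h2 y).mp (by rw [hyn]; exact hvis)
      rcases this with hV | hc
      · exact absurd hV (by rw [hfresh y hrs]; simp)
      · exact hc
    · exfalso
      apply hcolr
      have hcy := pvReach_col g s y hrs
      rw [hyn] at hcy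
      exact hcy.symm
  refine ⟨h1, h2, h3, h4, fun x hx => h5 x (List.mem_cons_of_mem _ hx), ?_, ?_⟩
  · intro x hx y hadj
    rcases h6 x hx y hadj with hc | hst
    · exact Or.inl hc
    · rcases List.mem_cons.mp hst with he | hr
      · exact Or.inl (hcover y he
          (Relation.ReflTransGen.tail (h4 x hx) hadj))
      · exact Or.inr hr
  · rcases h7 with hc | hst
    · exact Or.inl hc
    · rcases List.mem_cons.mp hst with he | hr
      · exact Or.inl (hcover s he Relation.ReflTransGen.refl)
      · exact Or.inr hr

theorem pvInv_mark (g : List (List Int)) (s : Nat × Nat) (V : List (List Bool))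
    (hs : pvInB g s) (hsh : pvVShape g V)
    (hfresh : ∀ x, pvReach g s x → pvVGet V x.1 x.2 = false)
    (cr cc : Int) (rest : List (Int × Int)) (cells : List (Nat × Nat)) (V' : List (List Bool))
    (hinv : pvFloodInv g s V ((cr, cc) :: rest) cells V')
    (hin : ¬ (cr < 0 ∨ (g.length : Int) ≤ cr ∨ cc < 0 ∨ (pvC g : Int) ≤ cc))
    (hgo : ¬ (pvVGet V' cr.toNat cc.toNat = true ∨ pvGridAt g cr.toNat cc.toNat ≠ pvColP g s)) :
    pvFloodInv g s V ((cr, cc + 1) :: (cr, cc - 1) :: (cr + 1, cc) :: (cr - 1, cc) :: rest)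
      (cells ++ [(cr.toNat, cc.toNat)]) (pvVSet V' cr.toNat cc.toNat) := by
  obtain ⟨h1, h2, h3, h4, h5, h6, h7⟩ := hinv
  push_neg at hin hgo
  obtain ⟨hc1, hc2, hc3, hc4⟩ := hin
  obtain ⟨hnv0, hcol⟩ := hgo
  have hnv : pvVGet V' cr.toNat cc.toNat = false := by simpa using hnv0
  set en : Nat × Nat := (cr.toNat, cc.toNat) with hen
  have heni : pvPairI en = (cr, cc) := by
    simp only [pvPairI, hen, Prod.mk.injEq]
    constructor <;> omega
  have henB : pvInB g en := by
    constructor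
    · show cr.toNat < g.length; omega
    · show cc.toNat < pvC g; omega
  have hcolen : pvColP g en = pvColP g s := hcol
  have hreachen : pvReach g s en := h5 en (by rw [heni]; exact List.mem_cons_self) henB hcolen
  have hnotmem : en ∉ cells := by
    intro hmem
    have h := (h2 en).mpr (Or.inr hmem)
    simp only [hen] at h
    rw [hnv] at h
    exact absurd h (by simp)
  refine ⟨pvVShape_set g V' en.1 en.2 h1, ?_, ?_, ?_, ?_, ?_, ?_⟩
  · intro x
    by_cases hx : x = en
    · subst hx
      rw [pvVGet_set_self g V' en.1 en.2 h1 henB.1 henB.2]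
      simp
    · have : (x.1, x.2) ≠ (en.1, en.2) := by
        intro hh; exact hx (by obtain ⟨a,b⟩ := x; obtain ⟨c,d⟩ := en; simpa using hh)
      rw [pvVGet_set_ne V' en.1 en.2 x.1 x.2 this, h2 x]
      constructor
      · rintro (hV | hc)
        · exact Or.inl hV
        · exact Or.inr (List.mem_append.mpr (Or.inl hc))
      · rintro (hV | hc)
        · exact Or.inl hV
        · rcases List.mem_append.mp hc with hcc | hee
          · exact Or.inr hcc
          · exact absurd (List.mem_singleton.mp hee) hx
  · refine List.Nodup.append h3 (List.nodup_singleton _) ?_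
    intro a ha hb
    rw [List.mem_singleton.mp hb] at ha
    exact hnotmem ha
  · intro x hx
    rcases List.mem_append.mp hx with hc | he
    · exact h4 x hc
    · rw [List.mem_singleton.mp he]
      exact hreachen
  · -- stack elements of the new stack reach s
    intro x hx hxB hxcol
    have hset : pvPairI x = (cr, cc + 1) ∨ pvPairI x = (cr, cc - 1) ∨
        pvPairI x = (cr + 1, cc) ∨ pvPairI x = (cr - 1, cc) ∨ pvPairI x ∈ rest := by
      simpa [List.mem_cons] using hx
    have hadjen : ∀ hgeo : (en.1 = x.1 ∧ (en.2 + 1 = x.2 ∨ x.2 + 1 = en.2)) ∨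
        (en.2 = x.2 ∧ (en.1 + 1 = x.1 ∨ x.1 + 1 = en.1)), pvReach g s x := by
      intro hgeo
      exact Relation.ReflTransGen.tail hreachen
        ⟨henB, hxB, hcolen.trans hxcol.symm, hgeo⟩
    have hx1 : (x.1 : Int) = (pvPairI x).1 := rfl
    have hx2 : (x.2 : Int) = (pvPairI x).2 := rfl
    rcases hset with he | he | he | he | he
    · refine hadjen (Or.inl ⟨?_, Or.inl ?_⟩) <;>
        · have e1 : (x.1 : Int) = cr := by rw [hx1, he]
          have e2 : (x.2 : Int) = cc + 1 := by rw [hx2, he]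
          simp only [hen]
          omega
    · refine hadjen (Or.inl ⟨?_, Or.inr ?_⟩) <;>
        · have e1 : (x.1 : Int) = cr := by rw [hx1, he]
          have e2 : (x.2 : Int) = cc - 1 := by rw [hx2, he]
          simp only [hen]
          omega
    · refine hadjen (Or.inr ⟨?_, Or.inl ?_⟩) <;>
        · have e1 : (x.1 : Int) = cr + 1 := by rw [hx1, he]
          have e2 : (x.2 : Int) = cc := by rw [hx2, he]
          simp only [hen]
          omega
    · refine hadjen (Or.inr ⟨?_, Or.inr ?_⟩) <;>
        · have e1 : (x.1 : Int) = cr - 1 := by rw [hx1, he]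
          have e2 : (x.2 : Int) = cc := by rw [hx2, he]
          simp only [hen]
          omega
    · exact h5 x (List.mem_cons_of_mem _ he) hxB hxcol
  · -- closure
    intro x hx y hadj
    have hrest_sub : ∀ z : Int × Int, z ∈ rest →
        z ∈ (cr, cc + 1) :: (cr, cc - 1) :: (cr + 1, cc) :: (cr - 1, cc) :: rest := by
      intro z hz
      simp [List.mem_cons, hz]
    rcases List.mem_append.mp hx with hxc | hxe
    · rcases h6 x hxc y hadj with hc | hst
      · exact Or.inl (List.mem_append.mpr (Or.inl hc))
      · rcases List.mem_cons.mp hst with he | hr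
        · -- y's pair is (cr, cc): y = en, now a cell
          have : y = en := pvPairI_inj _ _ (by rw [he, heni])
          exact Or.inl (List.mem_append.mpr (Or.inr (by simp [this])))
        · exact Or.inr (hrest_sub _ hr)
    · have hxen : x = en := List.mem_singleton.mp hxe
      subst hxen
      obtain ⟨_, hyB, _, hgeo⟩ := hadj
      have hyp1 : ((y.1 : Int), (y.2 : Int)) = pvPairI y := rfl
      rcases hgeo with ⟨ha, hb | hb⟩ | ⟨ha, hb | hb⟩
      · refine Or.inr ?_
        have : pvPairI y = (cr, cc + 1) := by
          obtain ⟨c, d⟩ := y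
          simp only [pvPairI, Prod.mk.injEq]
          simp only [hen] at ha hb
          constructor <;> omega
        rw [this]; exact List.mem_cons_self
      · refine Or.inr ?_
        have : pvPairI y = (cr, cc - 1) := by
          obtain ⟨c, d⟩ := y
          simp only [pvPairI, Prod.mk.injEq]
          simp only [hen] at ha hb
          constructor <;> omega
        rw [this]
        simp [List.mem_cons]
      · refine Or.inr ?_
        have : pvPairI y = (cr + 1, cc) := by
          obtain ⟨c, d⟩ := y
          simp only [pvPairI, Prod.mk.injEq]
          simp only [hen] at ha hb
          constructor <;> omega
        rw [this]
        simp [List.mem_cons]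
      · refine Or.inr ?_
        have : pvPairI y = (cr - 1, cc) := by
          obtain ⟨c, d⟩ := y
          simp only [pvPairI, Prod.mk.injEq]
          simp only [hen] at ha hb
          constructor <;> omega
        rw [this]
        simp [List.mem_cons]
  · rcases h7 with hc | hst
    · exact Or.inl (List.mem_append.mpr (Or.inl hc))
    · rcases List.mem_cons.mp hst with he | hr
      · have : s = en := pvPairI_inj _ _ (by rw [he, heni])
        exact Or.inl (List.mem_append.mpr (Or.inr (by simp [this])))
      · exact Or.inr (by simp [List.mem_cons, hr])

theorem pvFloodLoop_inv (g : List (List Int)) (s : Nat × Nat) (V : List (List Bool))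
    (hs : pvInB g s) (hsh : pvVShape g V)
    (hfresh : ∀ x, pvReach g s x → pvVGet V x.1 x.2 = false)
    (stack : List (Int × Int)) (cells : List (Nat × Nat)) (V' : List (List Bool))
    (hinv : pvFloodInv g s V stack cells V') :
    pvFloodInv g s V []
      (pvFloodLoop g g.length (pvC g) (pvColP g s) stack cells V').1
      (pvFloodLoop g g.length (pvC g) (pvColP g s) stack cells V').2 := by
  revert hinv
  induction stack, cells, V' using pvFloodLoop.induct g g.length (pvC g) (pvColP g s) with
  | case1 cells V' =>
    intro hinv
    rw [pvFloodLoop]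
    exact hinv
  | case2 cells V' cr cc rest hcond ih =>
    intro hinv
    have hstep : pvFloodLoop g g.length (pvC g) (pvColP g s) ((cr, cc) :: rest) cells V'
        = pvFloodLoop g g.length (pvC g) (pvColP g s) rest cells V' := by
      rw [pvFloodLoop]
      simp only [if_pos hcond]
    rw [hstep]
    exact ih (pvInv_skip g s V hs hfresh cr cc rest cells V' hinv (Or.inl hcond))
  | case3 cells V' cr cc rest hin hvis ih =>
    intro hinv
    have hstep : pvFloodLoop g g.length (pvC g) (pvColP g s) ((cr, cc) :: rest) cells V'
        = pvFloodLoop g g.length (pvC g) (pvColP g s) rest cells V' := by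
      rw [pvFloodLoop]
      simp only [if_neg hin, dif_pos hvis]
    rw [hstep]
    exact ih (pvInv_skip g s V hs hfresh cr cc rest cells V' hinv (Or.inr hvis))
  | case4 cells V' cr cc rest hin hgo ih =>
    intro hinv
    have hstep : pvFloodLoop g g.length (pvC g) (pvColP g s) ((cr, cc) :: rest) cells V'
        = pvFloodLoop g g.length (pvC g) (pvColP g s)
            ((cr, cc + 1) :: (cr, cc - 1) :: (cr + 1, cc) :: (cr - 1, cc) :: rest)
            (cells ++ [(cr.toNat, cc.toNat)]) (pvVSet V' cr.toNat cc.toNat) := by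
      rw [pvFloodLoop]
      simp only [if_neg hin, dif_neg hgo]
    rw [hstep]
    exact ih (pvInv_mark g s V hs hsh hfresh cr cc rest cells V' hinv hin hgo)

theorem pvFlood_spec (g : List (List Int)) (s : Nat × Nat) (V : List (List Bool))
    (hs : pvInB g s) (hsh : pvVShape g V)
    (hfresh : ∀ x, pvReach g s x → pvVGet V x.1 x.2 = false) :
    (∀ x, x ∈ (pvFloodLoop g g.length (pvC g) (pvColP g s) [pvPairI s] [] V).1 ↔ pvReach g s x) ∧
    (pvFloodLoop g g.length (pvC g) (pvColP g s) [pvPairI s] [] V).1.Nodup ∧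
    pvVShape g (pvFloodLoop g g.length (pvC g) (pvColP g s) [pvPairI s] [] V).2 ∧
    (∀ x : Nat × Nat,
      pvVGet (pvFloodLoop g g.length (pvC g) (pvColP g s) [pvPairI s] [] V).2 x.1 x.2 = true ↔
        (pvVGet V x.1 x.2 = true ∨ pvReach g s x)) := by
  have hinv0 : pvFloodInv g s V [pvPairI s] [] V := by
    refine ⟨hsh, by simp, List.nodup_nil, by simp, ?_, by simp, Or.inr List.mem_cons_self⟩
    intro x hx _ _
    have : x = s := pvPairI_inj x s (List.mem_singleton.mp hx)
    rw [this]
    exact Relation.ReflTransGen.refl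
  have hfin := pvFloodLoop_inv g s V hs hsh hfresh [pvPairI s] [] V hinv0
  obtain ⟨f1, f2, f3, f4, f5, f6, f7⟩ := hfin
  have hmem : ∀ x, x ∈ (pvFloodLoop g g.length (pvC g) (pvColP g s) [pvPairI s] [] V).1 ↔
      pvReach g s x := by
    intro x
    constructor
    · exact f4 x
    · intro hr
      induction hr with
      | refl =>
        rcases f7 with h | h
        · exact h
        · simp at h
      | tail _ hadj ih =>
        rcases f6 _ ih _ hadj with h | h
        · exact h
        · simp at h
  refine ⟨hmem, f3, f1, ?_⟩
  intro x
  rw [f2 x, hmem x]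

-- ---------- roots, component sizes ----------
@[reducible] def pvNonbg (g : List (List Int)) (bg : Int) (i : Nat) : Prop := pvColP g (pvCell g i) ≠ bg

def pvReps (g : List (List Int)) (bg : Int) (t : Nat) : List Nat :=
  (List.range t).filter (fun m => decide (pvFind g m = m ∧ pvNonbg g bg m))

def pvCnt (g : List (List Int)) (bg : Int) (m t : Nat) : Nat :=
  ((List.range t).filter (fun j => decide (pvNonbg g bg j ∧ pvFind g j = m))).length

theorem pvCells_length (g : List (List Int)) (bg : Int) (m : Nat) (hm : m < pvN g)
    (hroot : pvFind g m = m) (hnb : pvNonbg g bg m) (cells : List (Nat × Nat))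
    (hnd : cells.Nodup) (hmem : ∀ x, x ∈ cells ↔ pvReach g (pvCell g m) x) :
    cells.length = pvCnt g bg m (pvN g) := by
  have hinBm : pvInB g (pvCell g m) := pvInB_cell g m hm
  have hinB : ∀ x ∈ cells, pvInB g x := by
    intro x hx
    rcases pvReach_inB g _ x ((hmem x).mp hx) with he | ⟨_, hb⟩
    · rw [← he]; exact hinBm
    · exact hb
  have hinj : ∀ x ∈ cells, ∀ y ∈ cells, pvIdx g x = pvIdx g y → x = y := by
    intro x hx y hy hxy
    rw [← pvCell_idx g x (hinB x hx).2, ← pvCell_idx g y (hinB y hy).2, hxy]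
  have hndmap : (cells.map (pvIdx g)).Nodup := List.Nodup.map_on hinj hnd
  have hmemmap : ∀ j, j ∈ cells.map (pvIdx g) ↔
      (j < pvN g ∧ (pvNonbg g bg j ∧ pvFind g j = m)) := by
    intro j
    constructor
    · intro hj
      obtain ⟨x, hx, hxj⟩ := List.mem_map.mp hj
      have hxB := hinB x hx
      have hr := (hmem x).mp hx
      refine ⟨hxj ▸ pvIdx_lt g x hxB, ?_, ?_⟩
      · unfold pvNonbg
        rw [← hxj, pvCell_idx g x hxB.2]
        rw [← pvReach_col g _ _ hr]
        exact hnb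
      · rw [← hxj]
        exact (pvReach_iff_find g x hxB m hroot).mp hr
    · rintro ⟨hjN, hjnb, hjf⟩
      refine List.mem_map.mpr ⟨pvCell g j, ?_, pvIdx_cell g j⟩
      rw [hmem]
      refine (pvReach_iff_find g (pvCell g j) (pvInB_cell g j hjN) m hroot).mpr ?_
      rw [pvIdx_cell g j]
      exact hjf
  unfold pvCnt
  have hlm : cells.length = (cells.map (pvIdx g)).length := by simp
  rw [hlm]
  have hndf : ((List.range (pvN g)).filter
      (fun j => decide (pvNonbg g bg j ∧ pvFind g j = m))).Nodup :=
    List.Nodup.filter _ (List.nodup_range)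
  rw [← List.toFinset_card_of_nodup hndmap, ← List.toFinset_card_of_nodup hndf]
  congr 1
  apply Finset.ext
  intro j
  rw [List.mem_toFinset, List.mem_toFinset, hmemmap, List.mem_filter, List.mem_range,
    decide_eq_true_eq]

-- ---------- the scan of _find_objects ----------
def pvRel (g : List (List Int)) (bg : Int) (m : Nat) (o : PvObj) : Prop :=
  o.color = pvColP g (pvCell g m) ∧ o.size = (pvCnt g bg m (pvN g) : Int) ∧
    (∀ x, x ∈ o.cells ↔ pvReach g (pvCell g m) x)

def pvScanInv (g : List (List Int)) (bg : Int) (t : Nat)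
    (st : List (List Bool) × List PvObj) : Prop :=
  pvVShape g st.1 ∧
  (∀ x, pvInB g x → (pvVGet st.1 x.1 x.2 = true ↔ (pvColP g x ≠ bg ∧ pvFind g (pvIdx g x) < t))) ∧
  List.Forall₂ (pvRel g bg) (pvReps g bg t) st.2

theorem pvReps_succ (g : List (List Int)) (bg : Int) (t : Nat) :
    pvReps g bg (t + 1) = pvReps g bg t ++
      (if pvFind g t = t ∧ pvNonbg g bg t then [t] else []) := by
  unfold pvReps
  rw [List.range_succ, List.filter_append]
  congr 1
  by_cases h : pvFind g t = t ∧ pvNonbg g bg t <;> simp [h]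

theorem pvCnt_succ (g : List (List Int)) (bg : Int) (m t : Nat) :
    pvCnt g bg m (t + 1) = pvCnt g bg m t +
      (if pvNonbg g bg t ∧ pvFind g t = m then 1 else 0) := by
  unfold pvCnt
  rw [List.range_succ, List.filter_append, List.length_append]
  congr 1
  by_cases h : pvNonbg g bg t ∧ pvFind g t = m <;> simp [h]

theorem pvScanStep (g : List (List Int)) (bg : Int) (t : Nat) (ht : t < pvN g)
    (st : List (List Bool) × List PvObj) (h : pvScanInv g bg t st) :
    pvScanInv g bg (t + 1) (pvScanCell g g.length (pvC g) bg st (t / pvC g) (t % pvC g)) := by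
  have hx0B : pvInB g (pvCell g t) := pvInB_cell g t ht
  have hidx0 : pvIdx g (pvCell g t) = t := pvIdx_cell g t
  obtain ⟨h1, h2, h3⟩ := h
  unfold pvScanCell
  by_cases hg : pvVGet st.1 (t / pvC g) (t % pvC g) = false ∧
      pvGridAt g (t / pvC g) (t % pvC g) ≠ bg
  case neg =>
    rw [if_neg hg]
    have hnoroot : ¬ (pvFind g t = t ∧ pvNonbg g bg t) := by
      rintro ⟨hroot, hnb⟩
      apply hg
      refine ⟨?_, hnb⟩
      by_contra hvv
      have hv : pvVGet st.1 (pvCell g t).1 (pvCell g t).2 = true := by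
        simpa using hvv
      have hcon := (h2 (pvCell g t) hx0B).mp hv
      rw [hidx0, hroot] at hcon
      exact absurd hcon.2 (lt_irrefl t)
    refine ⟨h1, ?_, ?_⟩
    · intro x hxB
      rw [h2 x hxB]
      constructor
      · rintro ⟨ha, hb⟩; exact ⟨ha, by omega⟩
      · rintro ⟨ha, hb⟩
        refine ⟨ha, ?_⟩
        rcases Nat.lt_or_ge (pvFind g (pvIdx g x)) t with hlt | hge
        · exact hlt
        · exfalso
          have heq : pvFind g (pvIdx g x) = t := by omega
          apply hnoroot
          constructor
          · have hrt := pvFind_root g (pvIdx g x)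
            rw [heq] at hrt
            exact hrt
          · unfold pvNonbg
            have hr := pvFind_reach g (pvIdx g x)
            rw [heq, pvCell_idx g x hxB.2] at hr
            rw [← pvReach_col g _ _ hr]
            exact ha
    · rw [pvReps_succ, if_neg hnoroot, List.append_nil]
      exact h3
  case pos =>
    rw [if_pos hg]
    obtain ⟨hunv, hnbg⟩ := hg
    have hnb : pvColP g (pvCell g t) ≠ bg := hnbg
    have hroot : pvFind g t = t := by
      by_contra hne
      have hlt : pvFind g t < t := Nat.lt_of_le_of_ne (pvFind_le g t) hne
      have hvget := (h2 (pvCell g t) hx0B).mpr ⟨hnb, by rw [hidx0]; exact hlt⟩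
      rw [show pvVGet st.1 (pvCell g t).1 (pvCell g t).2
          = pvVGet st.1 (t / pvC g) (t % pvC g) from rfl, hunv] at hvget
      simp at hvget
    have hfresh : ∀ y, pvReach g (pvCell g t) y → pvVGet st.1 y.1 y.2 = false := by
      intro y hry
      rcases pvReach_inB g _ y hry with he | ⟨_, hyB⟩
      · rw [← he]; exact hunv
      · by_contra hvv
        have hv : pvVGet st.1 y.1 y.2 = true := by simpa using hvv
        have hcon := (h2 y hyB).mp hv
        have hfe := pvReach_find g _ _ hry
        rw [hidx0, hroot] at hfe
        have := hcon.2
        omega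
    have hspec := pvFlood_spec g (pvCell g t) st.1 hx0B h1 hfresh
    obtain ⟨fmem, fnd, fsh, fvget⟩ := hspec
    have hnonempty : pvCell g t ∈
        (pvFloodLoop g g.length (pvC g) (pvColP g (pvCell g t))
          [pvPairI (pvCell g t)] [] st.1).1 :=
      (fmem _).mpr Relation.ReflTransGen.refl
    have hflne : (pvFloodLoop g g.length (pvC g) (pvColP g (pvCell g t))
        [pvPairI (pvCell g t)] [] st.1).1 ≠ [] := by
      intro hnil
      rw [hnil] at hnonempty
      exact absurd hnonempty (List.not_mem_nil)
    rw [show pvFloodLoop g g.length (pvC g) (pvGridAt g (t / pvC g) (t % pvC g))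
        [(((t / pvC g : Nat) : Int), ((t % pvC g : Nat) : Int))] [] st.1
        = pvFloodLoop g g.length (pvC g) (pvColP g (pvCell g t))
          [pvPairI (pvCell g t)] [] st.1 from rfl]
    rw [if_neg hflne]
    refine ⟨fsh, ?_, ?_⟩
    · intro x hxB
      rw [fvget x]
      have hR : pvReach g (pvCell g t) x ↔ pvFind g (pvIdx g x) = t :=
        pvReach_iff_find g x hxB t hroot
      rw [h2 x hxB, hR]
      constructor
      · rintro (⟨ha, hb⟩ | hfeq)
        · exact ⟨ha, by omega⟩
        · refine ⟨?_, by omega⟩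
          have hry := (hR.mpr hfeq)
          rw [← pvReach_col g _ _ hry]
          exact hnb
      · rintro ⟨ha, hb⟩
        rcases Nat.lt_or_ge (pvFind g (pvIdx g x)) t with hlt | hge
        · exact Or.inl ⟨ha, hlt⟩
        · exact Or.inr (by omega)
    · rw [pvReps_succ, if_pos ⟨hroot, hnb⟩]
      refine List.rel_append h3 ?_
      refine List.forall₂_cons.mpr ⟨?_, List.Forall₂.nil⟩
      refine ⟨rfl, ?_, fmem⟩
      have hlen := pvCells_length g bg t ht hroot hnb _ fnd fmem
      rw [hlen]

theorem pvScan_spec (g : List (List Int)) (bg : Int) :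
    List.Forall₂ (pvRel g bg) (pvReps g bg (pvN g)) (pvFindObjects g bg) := by
  have hinit : pvScanInv g bg 0
      ((List.range g.length).map (fun _ => List.replicate (pvC g) false), ([] : List PvObj)) := by
    refine ⟨⟨by simp, ?_⟩, ?_, List.Forall₂.nil⟩
    · intro row hrow
      rcases List.mem_map.mp hrow with ⟨a, _, rfl⟩
      simp
    · intro x hxB
      constructor
      · intro hv
        exfalso
        have hfalse : pvVGet ((List.range g.length).map fun _ => List.replicate (pvC g) false)
            x.1 x.2 = false := by
          unfold pvVGet
          have hr1 : x.1 < ((List.range g.length).map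
              fun _ => List.replicate (pvC g) false).length := by
            simpa using hxB.1
          rw [List.getD_eq_getElem _ _ hr1, List.getElem_map]
          rw [List.getD_eq_getElem _ _ (by simpa using hxB.2)]
          simp
        rw [hfalse] at hv
        simp at hv
      · rintro ⟨_, hb⟩
        omega
  have hmain : ∀ t, t ≤ pvN g → pvScanInv g bg t
      ((List.range t).foldl
        (fun st i => pvScanCell g g.length (pvC g) bg st (i / pvC g) (i % pvC g))
        ((List.range g.length).map (fun _ => List.replicate (pvC g) false), [])) := by
    intro t
    induction t with
    | zero => intro _; simpa using hinit
    | succ t ih =>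
      intro ht
      rw [List.range_succ, List.foldl_append, List.foldl_cons, List.foldl_nil]
      exact pvScanStep g bg t (by omega) _ (ih (by omega))
  have hres := (hmain (pvN g) le_rfl).2.2
  have hobj : pvFindObjects g bg = ((List.range (pvN g)).foldl
      (fun st i => pvScanCell g g.length (pvC g) bg st (i / pvC g) (i % pvC g))
      ((List.range g.length).map (fun _ => List.replicate (pvC g) false), [])).2 := by
    unfold pvFindObjects
    dsimp only
    rw [pvFoldFlatten]
    rfl
  rw [hobj]
  exact hres

-- ---------- the sizes dict of B ----------
theorem pvMemReps (g : List (List Int)) (bg : Int) (t m : Nat) :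
    m ∈ pvReps g bg t ↔ (m < t ∧ pvFind g m = m ∧ pvColP g (pvCell g m) ≠ bg) := by
  unfold pvReps
  rw [List.mem_filter, List.mem_range, decide_eq_true_eq]

def pvSizesD (g : List (List Int)) (bg : Int) : PySem.Dict Nat Int :=
  (List.range g.length).foldl (fun d r =>
      (List.range (pvC g)).foldl (fun d c =>
        if pvGridAt g r c ≠ bg then
          d.modify (pvUfFind (pvParentF g) (r * pvC g + c)) 0 (· + 1) else d) d)
    (PySem.Dict.empty : PySem.Dict Nat Int)

theorem pvCnt_self_zero (g : List (List Int)) (bg : Int) (t : Nat) : pvCnt g bg t t = 0 := by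
  unfold pvCnt
  rw [List.length_eq_zero_iff, List.filter_eq_nil_iff]
  intro j hj
  have hjt : j < t := List.mem_range.mp hj
  simp only [decide_eq_true_eq, not_and]
  intro _
  have := pvFind_le g j
  omega

theorem pvSizes_spec (g : List (List Int)) (bg : Int) :
    (pvSizesD g bg).items
      = (pvReps g bg (pvN g)).map (fun m => (m, (pvCnt g bg m (pvN g) : Int))) := by
  unfold pvSizesD
  rw [pvFoldFlatten]
  suffices h : ∀ t, t ≤ pvN g →
      ((List.range t).foldl (fun d i =>
        if pvGridAt g (i / pvC g) (i % pvC g) ≠ bg then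
          d.modify (pvUfFind (pvParentF g) ((i / pvC g) * pvC g + i % pvC g)) 0 (· + 1) else d)
        (PySem.Dict.empty : PySem.Dict Nat Int)).items
      = (pvReps g bg t).map (fun m => (m, (pvCnt g bg m t : Int))) by
    exact h (pvN g) le_rfl
  intro t
  induction t with
  | zero => intro _; rfl
  | succ t ih =>
    intro ht
    have ihe := ih (by omega)
    rw [List.range_succ, List.foldl_append, List.foldl_cons, List.foldl_nil]
    have hkeyeq : (t / pvC g) * pvC g + t % pvC g = t := by
      rw [Nat.mul_comm]; exact Nat.div_add_mod t (pvC g)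
    rw [hkeyeq]
    set D := (List.range t).foldl (fun d i =>
        if pvGridAt g (i / pvC g) (i % pvC g) ≠ bg then
          d.modify (pvUfFind (pvParentF g) ((i / pvC g) * pvC g + i % pvC g)) 0 (· + 1) else d)
        (PySem.Dict.empty : PySem.Dict Nat Int) with hD
    have hkeys : D.keys = pvReps g bg t := by
      show D.items.map Prod.fst = pvReps g bg t
      rw [ihe, List.map_map,
        show (Prod.fst ∘ fun m => (m, (pvCnt g bg m t : Int))) = id from rfl, List.map_id]
    have hndk : D.keys.Nodup := by
      rw [hkeys]
      exact List.Nodup.filter _ List.nodup_range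
    by_cases hnb : pvGridAt g (t / pvC g) (t % pvC g) ≠ bg
    case neg =>
      rw [if_neg hnb]
      have hnbt : ¬ pvNonbg g bg t := by
        unfold pvNonbg
        simpa using hnb
      rw [ihe, pvReps_succ, if_neg (fun hh => hnbt hh.2), List.append_nil]
      apply List.map_congr_left
      intro m _
      rw [pvCnt_succ, if_neg (fun hh => hnbt hh.1)]
      simp
    case pos =>
      rw [if_pos hnb]
      have hnbt : pvNonbg g bg t := hnb
      have hmod : PySem.Dict.modify D (pvUfFind (pvParentF g) t) 0 (· + 1)
          = D.insert (pvFind g t) (D.getD (pvFind g t) 0 + 1) := rfl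
      rw [hmod]
      by_cases hroott : pvFind g t = t
      case pos =>
        rw [hroott]
        have hnotin : D.contains t = false := by
          rw [PySem.Dict.contains_eq_decide_mem_keys, hkeys]
          simp only [decide_eq_false_iff_not]
          intro hmem
          have := ((pvMemReps g bg t t).mp hmem).1
          omega
        have hgetD : D.getD t 0 = 0 := by
          have hnone : D.get? t = none := by
            rw [PySem.Dict.get?_eq_none_iff_not_mem_keys, hkeys]
            intro hmem
            have := ((pvMemReps g bg t t).mp hmem).1
            omega
          show (D.get? t).getD 0 = 0
          rw [hnone]
          rfl
        rw [hgetD, PySem.Dict.items_insert_of_not_contains D _ hnotin, ihe,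
          pvReps_succ, if_pos ⟨hroott, hnbt⟩, List.map_append]
        congr 1
        · apply List.map_congr_left
          intro m hm
          have hmlt := ((pvMemReps g bg t m).mp hm).1
          rw [pvCnt_succ, if_neg (by rintro ⟨_, hh⟩; rw [hroott] at hh; omega)]
          simp
        · have hcnt : pvCnt g bg t (t + 1) = 1 := by
            rw [pvCnt_succ, if_pos ⟨hnbt, hroott⟩, pvCnt_self_zero]
          simp [hcnt]
      case neg =>
        have hm0lt : pvFind g t < t := Nat.lt_of_le_of_ne (pvFind_le g t) hroott
        have hm0root : pvFind g (pvFind g t) = pvFind g t := pvFind_root g t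
        have hm0nb : pvColP g (pvCell g (pvFind g t)) ≠ bg := by
          have hr := pvFind_reach g t
          rw [← pvReach_col g _ _ hr]
          exact hnbt
        have hm0mem : pvFind g t ∈ pvReps g bg t :=
          (pvMemReps g bg t _).mpr ⟨hm0lt, hm0root, hm0nb⟩
        have hcont : D.contains (pvFind g t) = true := by
          rw [PySem.Dict.contains_eq_decide_mem_keys, hkeys]
          simpa using hm0mem
        have hmemitems : (pvFind g t, (pvCnt g bg (pvFind g t) t : Int)) ∈ D.items := by
          rw [ihe]
          exact List.mem_map.mpr ⟨pvFind g t, hm0mem, rfl⟩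
        have hgetD : D.getD (pvFind g t) 0 = (pvCnt g bg (pvFind g t) t : Int) :=
          PySem.Dict.getD_of_mem_items D hmemitems hndk 0
        rw [hgetD, PySem.Dict.items_insert_of_contains D _ hcont, ihe, List.map_map,
          pvReps_succ, if_neg (fun hh => hroott hh.1), List.append_nil]
        apply List.map_congr_left
        intro m hm
        simp only [Function.comp]
        by_cases hmm : m = pvFind g t
        · subst hmm
          rw [if_pos (by simp)]
          rw [pvCnt_succ, if_pos ⟨hnbt, rfl⟩]
          push_cast
          ring_nf
        · rw [if_neg (by simpa using hmm)]
          rw [pvCnt_succ, if_neg (by rintro ⟨_, hh⟩; exact hmm hh.symm)]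
          simp

-- ---------- bg agreement ----------
theorem pvBg_eq (g : List (List Int)) : pvAltBg g = pvBg g := by
  unfold pvAltBg pvBg pvAltCounts
  have hc : PySem.Dict.counter (g.flatMap (fun row => row))
      = (g.flatMap (fun row => row)).foldl (fun d x => d.modify x 0 (· + 1))
          PySem.Dict.empty := rfl
  rw [hc, pvFoldlFlatMap]

-- ---------- write phase of A ----------
theorem pvRowLen_set (res : List (List Int)) (a b : Nat) (L : Int) (r : Nat) :
    ((res.set a ((res.getD a []).set b L)).getD r []).length = (res.getD r []).length := by
  rw [pvGetD_set]
  by_cases h : r = a ∧ a < res.length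
  · rw [if_pos h, List.length_set, h.1]
  · rw [if_neg h]

theorem pvGridAt_set2 (res : List (List Int)) (x : Nat × Nat) (L : Int) (r c : Nat) :
    pvGridAt (res.set x.1 ((res.getD x.1 []).set x.2 L)) r c
      = if r = x.1 ∧ c = x.2 ∧ x.1 < res.length ∧ x.2 < (res.getD x.1 []).length then L
        else pvGridAt res r c := by
  obtain ⟨x1, x2⟩ := x
  simp only
  unfold pvGridAt
  rw [pvGetD_set]
  by_cases h1 : r = x1 ∧ x1 < res.length
  · rw [if_pos h1, pvGetD_set]
    by_cases h2 : c = x2 ∧ x2 < (res.getD x1 []).length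
    · rw [if_pos h2, if_pos ⟨h1.1, h2.1, h1.2, h2.2⟩]
    · rw [if_neg h2, if_neg (by rintro ⟨ha, hb, hc', hd⟩; exact h2 ⟨hb, hd⟩), h1.1]
  · rw [if_neg h1, if_neg (by rintro ⟨ha, hb, hc', hd⟩; exact h1 ⟨ha, hc'⟩)]

theorem pvWriteFold (L : Int) (S : List (Nat × Nat)) (res : List (List Int)) (r c : Nat) :
    pvGridAt (S.foldl (fun res rc => res.set rc.1 ((res.getD rc.1 []).set rc.2 L)) res) r c
      = if (r, c) ∈ S ∧ r < res.length ∧ c < (res.getD r []).length then L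
        else pvGridAt res r c := by
  induction S generalizing res with
  | nil => simp
  | cons x S ih =>
    rw [List.foldl_cons, ih, List.length_set, pvRowLen_set, pvGridAt_set2]
    by_cases h1 : (r, c) ∈ S ∧ r < res.length ∧ c < (res.getD r []).length
    · rw [if_pos h1, if_pos ⟨List.mem_cons_of_mem _ h1.1, h1.2⟩]
    · rw [if_neg h1]
      by_cases h2 : r = x.1 ∧ c = x.2 ∧ x.1 < res.length ∧ x.2 < (res.getD x.1 []).length
      · obtain ⟨ha, hb, hc', hd⟩ := h2
        rw [if_pos ⟨ha, hb, hc', hd⟩]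
        rw [if_pos ⟨List.mem_cons.mpr (Or.inl (by rw [ha, hb])), by rw [ha]; exact hc',
          by rw [hb, ha]; exact hd⟩]
      · have hneg : ¬((r, c) ∈ x :: S ∧ r < res.length ∧ c < (res.getD r []).length) := by
          rintro ⟨hm, hb1, hb2⟩
          rcases List.mem_cons.mp hm with he | hs
          · cases he
            exact h2 ⟨rfl, rfl, hb1, hb2⟩
          · exact h1 ⟨hs, hb1, hb2⟩
        rw [if_neg h2, if_neg hneg]

theorem pvWriteFold_shape (L : Int) (S : List (Nat × Nat)) (res : List (List Int)) :
    (S.foldl (fun res rc => res.set rc.1 ((res.getD rc.1 []).set rc.2 L)) res).length = res.length ∧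
    ∀ r, ((S.foldl (fun res rc => res.set rc.1 ((res.getD rc.1 []).set rc.2 L)) res).getD r []).length
          = (res.getD r []).length := by
  induction S generalizing res with
  | nil => exact ⟨rfl, fun _ => rfl⟩
  | cons x S ih =>
    rw [List.foldl_cons]
    obtain ⟨ihl, ihr⟩ := ih (res.set x.1 ((res.getD x.1 []).set x.2 L))
    refine ⟨by rw [ihl, List.length_set], fun r => by rw [ihr r, pvRowLen_set]⟩

-- union of all object cell lists = the non-background cells
theorem pvFlatCells (g : List (List Int)) (bg : Int) (reps : List Nat) (objs : List PvObj)
    (h : List.Forall₂ (pvRel g bg) reps objs) (x : Nat × Nat) :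
    (∃ o ∈ objs, x ∈ o.cells) ↔ ∃ m ∈ reps, pvReach g (pvCell g m) x := by
  induction h with
  | nil => simp
  | cons hrel htail ih =>
    rename_i m o reps' objs'
    simp only [List.mem_cons]
    constructor
    · rintro ⟨o', ho', hxo⟩
      rcases ho' with he | hmem
      · subst he
        exact ⟨m, Or.inl rfl, (hrel.2.2 x).mp hxo⟩
      · obtain ⟨m', hm', hr⟩ := ih.mp ⟨o', hmem, hxo⟩
        exact ⟨m', Or.inr hm', hr⟩
    · rintro ⟨m', hm', hr⟩
      rcases hm' with he | hmem
      · subst he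
        exact ⟨o, Or.inl rfl, (hrel.2.2 x).mpr hr⟩
      · obtain ⟨o', ho', hxo⟩ := ih.mpr ⟨m', hmem, hr⟩
        exact ⟨o', Or.inr ho', hxo⟩

theorem pvRepsReach (g : List (List Int)) (bg : Int) (x : Nat × Nat) :
    (∃ m ∈ pvReps g bg (pvN g), pvReach g (pvCell g m) x) ↔
      (pvInB g x ∧ pvColP g x ≠ bg) := by
  constructor
  · rintro ⟨m, hm, hr⟩
    obtain ⟨hmN, hroot, hnb⟩ := (pvMemReps g bg (pvN g) m).mp hm
    have hinBm := pvInB_cell g m hmN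
    constructor
    · rcases pvReach_inB g _ x hr with he | ⟨_, hb⟩
      · rw [← he]; exact hinBm
      · exact hb
    · rw [← pvReach_col g _ _ hr]
      exact hnb
  · rintro ⟨hxB, hxnb⟩
    refine ⟨pvFind g (pvIdx g x), ?_, ?_⟩
    · refine (pvMemReps g bg (pvN g) _).mpr ⟨?_, pvFind_root g _, ?_⟩
      · exact lt_of_le_of_lt (pvFind_le g _) (pvIdx_lt g x hxB)
      · have hr := pvFind_reach g (pvIdx g x)
        rw [pvCell_idx g x hxB.2] at hr
        rw [← pvReach_col g _ _ hr]
        exact hxnb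
    · have hr := pvFind_reach g (pvIdx g x)
      rw [pvCell_idx g x hxB.2] at hr
      exact pvReach_symm _ _ _ hr

theorem pvUnionCells (g : List (List Int)) (bg : Int) (x : Nat × Nat) :
    (∃ o ∈ pvFindObjects g bg, x ∈ o.cells) ↔ (pvInB g x ∧ pvColP g x ≠ bg) := by
  rw [pvFlatCells g bg _ _ (pvScan_spec g bg) x]
  exact pvRepsReach g bg x

theorem pvQlist (g : List (List Int)) (bg : Int) (reps : List Nat) (objs : List PvObj)
    (h : List.Forall₂ (pvRel g bg) reps objs) :
    List.Forall₂ (fun (o : PvObj) (kv : Nat × Int) =>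
      o.color = pvColP g (pvCell g kv.1) ∧ o.size = kv.2)
      objs (reps.map (fun m => (m, (pvCnt g bg m (pvN g) : Int)))) := by
  induction h with
  | nil => exact List.Forall₂.nil
  | cons hrel _ ih => exact List.forall₂_cons.mpr ⟨⟨hrel.1, hrel.2.1⟩, ih⟩

theorem pvGridAt_getElem (l : List (List Int)) (r c : Nat) (h1 : r < l.length)
    (h2 : c < l[r].length) : l[r][c] = pvGridAt l r c := by
  unfold pvGridAt
  rw [List.getD_eq_getElem _ _ h1, List.getD_eq_getElem _ _ h2]

-- ===== VERDICT (by name: the statement is the Claim_ definition above) =====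
theorem p_max_color_per_object_spec : Claim_equal_p_max_color_per_object := by
  unfold Claim_equal_p_max_color_per_object
  intro g _ hpre
  unfold Spec_p_max_color_per_object
  have hA : p_max_color_per_object g
      = (match PySem.List.max? (pvFindObjects g (pvBg g)) (fun o => o.size) with
         | none => g
         | some largest =>
            (pvFindObjects g (pvBg g)).foldl (fun res o =>
              o.cells.foldl (fun res rc =>
                res.set rc.1 ((res.getD rc.1 []).set rc.2 largest.color)) res)
              ((List.range g.length).map (fun _ => List.replicate (pvC g) (pvBg g)))) := rfl
  have hB : p_max_color_per_object_alt g
      = (match PySem.List.max? (pvSizesD g (pvAltBg g)).items (fun kv => kv.2) with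
         | none => g
         | some kv =>
            g.map (fun row => (PySem.List.slice row none (some ((pvC g : Nat) : Int))).map
              (fun v =>
                if v = pvAltBg g then v else pvGridAt g (kv.1 / pvC g) (kv.1 % pvC g)))) := rfl
  rw [hA, hB, pvBg_eq]
  have hsc := pvScan_spec g (pvBg g)
  have hsi := pvSizes_spec g (pvBg g)
  have hQ := pvQlist g (pvBg g) _ _ hsc
  rw [← hsi] at hQ
  have hrel := pvMaxRel _ (pvFindObjects g (pvBg g)) (pvSizesD g (pvBg g)).items
      (fun o : PvObj => o.size) (fun kv : Nat × Int => kv.2) hQ (fun a b hab => hab.2)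
  generalize hm1 : PySem.List.max? (pvFindObjects g (pvBg g)) (fun o => o.size) = o1 at hrel ⊢
  generalize hm2 : PySem.List.max? (pvSizesD g (pvBg g)).items (fun kv => kv.2) = o2 at hrel ⊢
  cases hrel with
  | none => rfl
  | some hq =>
    rename_i largest kv
    obtain ⟨hcolor, _⟩ := hq
    show (pvFindObjects g (pvBg g)).foldl (fun res o =>
        o.cells.foldl (fun res rc =>
          res.set rc.1 ((res.getD rc.1 []).set rc.2 largest.color)) res)
        ((List.range g.length).map (fun _ => List.replicate (pvC g) (pvBg g)))
      = g.map (fun row => (PySem.List.slice row none (some ((pvC g : Nat) : Int))).map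
          (fun v => if v = pvBg g then v else pvGridAt g (kv.1 / pvC g) (kv.1 % pvC g)))
    rw [← pvFoldlFlatMap (pvFindObjects g (pvBg g)) (fun o => o.cells)
        (fun res rc => res.set rc.1 ((res.getD rc.1 []).set rc.2 largest.color))
        ((List.range g.length).map (fun _ => List.replicate (pvC g) (pvBg g)))]
    have hLC : largest.color = pvGridAt g (kv.1 / pvC g) (kv.1 % pvC g) := hcolor
    have hres0len : ((List.range g.length).map
        (fun _ => List.replicate (pvC g) (pvBg g))).length = g.length := by simp
    have hres0row : ∀ r, r < g.length → ((List.range g.length).map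
        (fun _ => List.replicate (pvC g) (pvBg g))).getD r [] = List.replicate (pvC g) (pvBg g) := by
      intro r hr
      rw [List.getD_eq_getElem _ _ (by simpa using hr), List.getElem_map]
    have hshape := pvWriteFold_shape largest.color
      ((pvFindObjects g (pvBg g)).flatMap (fun o => o.cells))
      ((List.range g.length).map (fun _ => List.replicate (pvC g) (pvBg g)))
    have hSmem : ∀ r c : Nat, ((r, c) ∈ (pvFindObjects g (pvBg g)).flatMap (fun o => o.cells) ↔
        (pvInB g (r, c) ∧ pvColP g (r, c) ≠ pvBg g)) := by
      intro r c
      rw [List.mem_flatMap]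
      constructor
      · rintro ⟨o, ho, hm⟩
        exact (pvUnionCells g (pvBg g) (r, c)).mp ⟨o, ho, hm⟩
      · intro h
        obtain ⟨o, ho, hm⟩ := (pvUnionCells g (pvBg g) (r, c)).mpr h
        exact ⟨o, ho, hm⟩
    have hrowg : ∀ (r : Nat) (hr : r < g.length), pvC g ≤ g[r].length :=
      fun r hr => hpre _ (List.getElem_mem hr)
    apply List.ext_getElem
    · rw [hshape.1, hres0len]
      simp
    · intro r h1 h2
      have hrg : r < g.length := by simpa using h2
      apply List.ext_getElem
      · have hll : (((( pvFindObjects g (pvBg g)).flatMap (fun o => o.cells)).foldl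
            (fun res rc => res.set rc.1 ((res.getD rc.1 []).set rc.2 largest.color))
            ((List.range g.length).map (fun _ => List.replicate (pvC g) (pvBg g)))).getD
              r []).length = pvC g := by
          rw [hshape.2 r, hres0row r hrg]
          simp
        rw [← List.getD_eq_getElem _ [] h1, hll, List.getElem_map, List.length_map,
          PySem.List.slice_to_natCast, List.length_take, Nat.min_eq_left (hrowg r hrg)]
      · intro c hc1 hc2
        have hcC : c < pvC g := by
          rw [List.getElem_map, List.length_map, PySem.List.slice_to_natCast,
            List.length_take] at hc2
          omega
        rw [pvGridAt_getElem _ r c h1 hc1, pvWriteFold]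
        have hbnd : r < ((List.range g.length).map
            (fun _ => List.replicate (pvC g) (pvBg g))).length ∧
            c < (((List.range g.length).map
              (fun _ => List.replicate (pvC g) (pvBg g))).getD r []).length := by
          refine ⟨by simpa using hrg, ?_⟩
          rw [hres0row r hrg]
          simpa using hcC
        have hrhs : (g.map (fun row => (PySem.List.slice row none (some ((pvC g : Nat) : Int))).map
            (fun v => if v = pvBg g then v else pvGridAt g (kv.1 / pvC g) (kv.1 % pvC g))))[r][c]
            = (if pvGridAt g r c = pvBg g then pvGridAt g r c
               else pvGridAt g (kv.1 / pvC g) (kv.1 % pvC g)) := by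
          have hcg : c < g[r].length := lt_of_lt_of_le hcC (hrowg r hrg)
          simp only [List.getElem_map, PySem.List.slice_to_natCast, List.getElem_take]
          rw [pvGridAt_getElem g r c hrg hcg]
        rw [hrhs]
        by_cases hv : pvGridAt g r c = pvBg g
        · rw [if_pos hv]
          rw [if_neg (by
            rintro ⟨hmem, _⟩
            exact ((hSmem r c).mp hmem).2 hv)]
          unfold pvGridAt
          rw [hres0row r hrg, List.getD_eq_getElem _ _ (by simpa using hcC),
            List.getElem_replicate]
          exact hv.symm
        · rw [if_neg hv]
          rw [if_pos ⟨(hSmem r c).mpr ⟨⟨hrg, hcC⟩, hv⟩, hbnd⟩]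
          exact hLC
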